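-- pv_equiv track=rewrite | github.com/PlaidMoon99/Algorithm_challenge | container.py | solution
-- ===== SOURCE A (Python) =====
-- from collections import deque
--
-- def solution(storage, requests):
--     n = len(storage)
--     m = len(storage[0])
--     grid = [list(row) for row in storage]
--
--     dr = [-1, 1, 0, 0]
--     dc = [0, 0, -1, 1]
--
--     # 현재 그리드에서 '외부에 연결된 빈칸(.)'을 표시하는 BFS
--     def compute_external_empty():
--         visited = [[False]*m for _ in range(n)]
--         q = deque()
--
--         # 테두리의 빈칸들을 시작점으로 추가
--         for r in range(n):
--             for c in (0, m-1):
--                 if grid[r][c] == '.' and not visited[r][c]: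
--                     visited[r][c] = True
--                     q.append((r, c))
--         for c in range(m):
--             for r in (0, n-1):
--                 if grid[r][c] == '.' and not visited[r][c]:
--                     visited[r][c] = True
--                     q.append((r, c))
--
--         while q:
--             r, c = q.popleft()
--             for i in range(4):
--                 nr, nc = r + dr[i], c + dc[i]
--                 if 0 <= nr < n and 0 <= nc < m and not visited[nr][nc] and grid[nr][nc] == '.':
--                     visited[nr][nc] = True
--                     q.append((nr, nc))
--         return visited
--
--     for req in requests:
--         target = req[0]
--         if len(req) == 2:
--             # 크레인: 해당 글자 전부 제거
--             for r in range(n):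
--                 for c in range(m):
--                     if grid[r][c] == target:
--                         grid[r][c] = '.'
--         else:
--             # 지게차: 요청 순간 접근 가능한 것만 제거
--             visited_empty = compute_external_empty()
--             to_remove = []
--             for r in range(n):
--                 for c in range(m):
--                     if grid[r][c] != target:
--                         continue
--                     accessible = False
--                     for i in range(4):
--                         nr, nc = r + dr[i], c + dc[i]
--                         # 격자 밖으로 인접 -> 바로 외부와 연결된 것
--                         if not (0 <= nr < n and 0 <= nc < m):
--                             accessible = True
--                             break
--                         # 인접 칸이 빈칸이고 그 빈칸이 외부와 연결된 경우
--                         if grid[nr][nc] == '.' and visited_empty[nr][nc]: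
--                             accessible = True
--                             break
--                     if accessible:
--                         to_remove.append((r, c))
--             for r, c in to_remove:
--                 grid[r][c] = '.'
--
--     # 남아있는 컨테이너 수 반환
--     return sum(1 for r in range(n) for c in range(m) if grid[r][c] != '.')
-- ===== SOURCE B (Python) =====
-- def solution(storage, requests):
--     n = len(storage)
--     m = len(storage[0])
--     grid = [list(row[:m]) for row in storage]
--
--     def border(r, c):
--         return r == 0 or r == n - 1 or c == 0 or c == m - 1
--
--     def near(e, r, c):
--         return ((r > 0 and e[r - 1][c]) or (r + 1 < n and e[r + 1][c]) or
--                 (c > 0 and e[r][c - 1]) or (c + 1 < m and e[r][c + 1]))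
--
--     def external():
--         # round-based saturation to a fixpoint instead of a BFS queue
--         e = [[grid[r][c] == '.' and border(r, c) for c in range(m)] for r in range(n)]
--         for _ in range(n * m):
--             ne = [[e[r][c] or (grid[r][c] == '.' and near(e, r, c))
--                    for c in range(m)] for r in range(n)]
--             if ne == e:
--                 break
--             e = ne
--         return e
--
--     for req in requests:
--         target = req[0]
--         if len(req) == 2:
--             grid = [[('.' if ch == target else ch) for ch in row] for row in grid]
--         else:
--             e = external()
--             grid = [[('.' if grid[r][c] == target and (border(r, c) or near(e, r, c))
--                       else grid[r][c]) for c in range(m)] for r in range(n)]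
--
--     return sum(ch != '.' for row in grid for ch in row)
-- ===== Notes on version B (the rewrite author's own statement) =====
-- stated objective: alternative
-- what changed: The forklift branch's queue-based BFS over external empty cells plus the separate per-cell neighbour rescan is replaced by a round-based saturation of the reachable-empty set to a fixpoint, and every grid update (crane clear, forklift removal, final count) is a functional rebuild of the grid instead of in-place mutation with index loops.
import Mathlib
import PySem

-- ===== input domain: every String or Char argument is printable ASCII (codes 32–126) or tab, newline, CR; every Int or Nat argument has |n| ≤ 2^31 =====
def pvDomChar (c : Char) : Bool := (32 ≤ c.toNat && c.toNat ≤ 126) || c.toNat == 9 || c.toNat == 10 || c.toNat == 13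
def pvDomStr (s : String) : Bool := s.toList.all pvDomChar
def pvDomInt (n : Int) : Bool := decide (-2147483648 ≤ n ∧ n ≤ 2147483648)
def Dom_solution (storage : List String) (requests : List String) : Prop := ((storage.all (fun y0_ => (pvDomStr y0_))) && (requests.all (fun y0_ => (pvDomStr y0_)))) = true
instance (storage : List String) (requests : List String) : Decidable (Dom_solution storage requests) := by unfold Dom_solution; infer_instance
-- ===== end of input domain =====

-- B replaces A's queue-based BFS over external empty cells by a round-based saturation to a
-- fixpoint and rebuilds the grid functionally instead of mutating it in place (objective:
-- alternative algorithm, return value only; neither Python mutates its arguments).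

-- ===== PORT A =====
-- shared cell accessors / writers (grid[r][c] reads and grid[r][c]='.' writes; in-range on Pre_ inputs)
def cget (g : List (List Char)) (r c : Nat) : Char := (g.getD r []).getD c ' '
def bget (v : List (List Bool)) (r c : Nat) : Bool := (v.getD r []).getD c false
def setDot (g : List (List Char)) (r c : Nat) : List (List Char) := g.set r ((g.getD r []).set c '.')
def setTrue (v : List (List Bool)) (r c : Nat) : List (List Bool) := v.set r ((v.getD r []).set c true)

def dirsA : List (Int × Int) := [(-1, 0), (1, 0), (0, -1), (0, 1)]

def inRangeA (n m : Nat) (nr nc : Int) : Bool :=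
  decide (0 ≤ nr) && decide (nr < (n : Int)) && decide (0 ≤ nc) && decide (nc < (m : Int))

-- body of A's BFS inner `for i in range(4)` loop
def stepOneA (g : List (List Char)) (n m : Nat) (st : List (List Bool) × List (Nat × Nat))
    (nr nc : Int) : List (List Bool) × List (Nat × Nat) :=
  if inRangeA n m nr nc && !bget st.1 nr.toNat nc.toNat && decide (cget g nr.toNat nc.toNat = '.') then
    (setTrue st.1 nr.toNat nc.toNat, st.2 ++ [(nr.toNat, nc.toNat)])
  else st

-- A's `while q:` loop; fuel only makes it total (n*m + |q| is enough, proved below)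
def bfsAuxA (g : List (List Char)) (n m : Nat) :
    Nat → List (List Bool) → List (Nat × Nat) → List (List Bool)
  | 0, v, _ => v
  | _ + 1, v, [] => v
  | fuel + 1, v, (r, c) :: q =>
      let st := dirsA.foldl (fun st d => stepOneA g n m st ((r : Int) + d.1) ((c : Int) + d.2)) (v, q)
      bfsAuxA g n m fuel st.1 st.2

-- body of A's two border-seeding loops
def seedCellA (g : List (List Char)) (st : List (List Bool) × List (Nat × Nat)) (r c : Nat) :
    List (List Bool) × List (Nat × Nat) :=
  if decide (cget g r c = '.') && !bget st.1 r c then (setTrue st.1 r c, st.2 ++ [(r, c)]) else st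

def computeExternalA (g : List (List Char)) (n m : Nat) : List (List Bool) :=
  let st0 : List (List Bool) × List (Nat × Nat) := (List.replicate n (List.replicate m false), [])
  let st1 := (List.range n).foldl (fun st r => [0, m - 1].foldl (fun st c => seedCellA g st r c) st) st0
  let st2 := (List.range m).foldl (fun st c => [0, n - 1].foldl (fun st r => seedCellA g st r c) st) st1
  bfsAuxA g n m (n * m + st2.2.length) st2.1 st2.2

-- A's inner accessibility loop (`for i in range(4): ... break` = List.any)
def accessibleA (g : List (List Char)) (v : List (List Bool)) (n m r c : Nat) : Bool :=
  dirsA.any fun d =>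
    let nr := (r : Int) + d.1
    let nc := (c : Int) + d.2
    if !inRangeA n m nr nc then true
    else decide (cget g nr.toNat nc.toNat = '.') && bget v nr.toNat nc.toNat

def craneA (g : List (List Char)) (n m : Nat) (t : Char) : List (List Char) :=
  (List.range n).foldl (fun g r =>
    (List.range m).foldl (fun g c => if cget g r c = t then setDot g r c else g) g) g

def forkA (g : List (List Char)) (n m : Nat) (t : Char) : List (List Char) :=
  let v := computeExternalA g n m
  let rem := (List.range n).foldl (fun acc r =>
    (List.range m).foldl (fun acc c =>
      if ¬(cget g r c = t) then acc
      else if accessibleA g v n m r c then acc ++ [(r, c)] else acc) acc) ([] : List (Nat × Nat))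
  rem.foldl (fun g p => setDot g p.1 p.2) g

def solution (storage : List String) (requests : List String) : Int :=
  let n := storage.length
  let m := (storage.headD "").toList.length   -- len(storage[0]); exact on Pre_ (storage ≠ [])
  let g0 := storage.map String.toList
  let gf := requests.foldl (fun g req =>
    let t := req.toList.headD ' '             -- req[0]; exact on Pre_ (req ≠ "")
    if req.toList.length = 2 then craneA g n m t else forkA g n m t) g0
  (List.range n).foldl (fun s r =>
    (List.range m).foldl (fun s c => if ¬(cget gf r c = '.') then s + 1 else s) s) (0 : Int)

-- ===== PORT B =====
def borderB (n m r c : Nat) : Bool :=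
  decide (r = 0) || decide (r = n - 1) || decide (c = 0) || decide (c = m - 1)

def nearB (n m : Nat) (e : List (List Bool)) (r c : Nat) : Bool :=
  (decide (0 < r) && bget e (r - 1) c) || (decide (r + 1 < n) && bget e (r + 1) c) ||
  (decide (0 < c) && bget e r (c - 1)) || (decide (c + 1 < m) && bget e r (c + 1))

def extStepB (g : List (List Char)) (n m : Nat) (e : List (List Bool)) : List (List Bool) :=
  (List.range n).map fun r => (List.range m).map fun c =>
    bget e r c || (decide (cget g r c = '.') && nearB n m e r c)

-- B's `for _ in range(k): ... if ne == e: break` loop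
def iterFixB (f : List (List Bool) → List (List Bool)) :
    Nat → List (List Bool) → List (List Bool)
  | 0, e => e
  | k + 1, e => let ne := f e; if ne = e then e else iterFixB f k ne

def externalB (g : List (List Char)) (n m : Nat) : List (List Bool) :=
  iterFixB (extStepB g n m) (n * m)
    ((List.range n).map fun r => (List.range m).map fun c =>
      decide (cget g r c = '.') && borderB n m r c)

def craneB (t : Char) (g : List (List Char)) : List (List Char) :=
  g.map fun row => row.map fun ch => if ch = t then '.' else ch

def forkB (g : List (List Char)) (n m : Nat) (t : Char) : List (List Char) :=
  let e := externalB g n m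
  (List.range n).map fun r => (List.range m).map fun c =>
    if decide (cget g r c = t) && (borderB n m r c || nearB n m e r c) then '.' else cget g r c

def solution_alt (storage : List String) (requests : List String) : Int :=
  let n := storage.length
  let m := (storage.headD "").toList.length
  let g0 := storage.map fun s => s.toList.take m
  let gf := requests.foldl (fun g req =>
    let t := req.toList.headD ' '
    if req.toList.length = 2 then craneB t g else forkB g n m t) g0
  ((gf.map fun row => row.countP fun ch => ch ≠ '.').sum : Nat)

-- ===== PRECONDITION & SPEC =====
-- Pre_ is exactly where A returns: storage[0] needs storage ≠ [], req[0] needs req ≠ "", the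
-- final count (and every branch) indexes row[c] for c < m, and a forklift request (len ≠ 2)
-- indexes grid[r][0] / grid[r][m-1], which raises when m = 0.
def Pre_solution (storage : List String) (requests : List String) : Prop :=
  storage ≠ [] ∧
  (∀ row ∈ storage, (storage.headD "").toList.length ≤ row.toList.length) ∧
  (∀ req ∈ requests, req ≠ "") ∧
  (1 ≤ (storage.headD "").toList.length ∨ ∀ req ∈ requests, req.toList.length = 2)

instance (storage : List String) (requests : List String) : Decidable (Pre_solution storage requests) := by
  unfold Pre_solution; infer_instance

def pvWitness_solution : List String × List String := (["A.", ".B"], ["A", "BX"])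

def Spec_solution (storage : List String) (requests : List String) (out : Int) : Prop := out = solution_alt storage requests
instance (storage : List String) (requests : List String) (out : Int) : Decidable (Spec_solution storage requests out) := by unfold Spec_solution; infer_instance

-- ===== CLAIM (what is proved, stated in full; the proofs are below) =====
def Claim_equal_solution : Prop := ∀ (storage : List String) (requests : List String), Dom_solution storage requests → Pre_solution storage requests → Spec_solution storage requests (solution storage requests)

-- ===== LEMMAS AND PROOFS =====

-- ---------- generic fold helpers ----------
theorem foldl_inv {σ α : Type} (f : σ → α → σ) (l : List α) (P : σ → Prop)
    (h : ∀ s a, a ∈ l → P s → P (f s a)) : ∀ s, P s → P (l.foldl f s) := by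
  induction l with
  | nil => intro s hs; simpa using hs
  | cons b t ih =>
      intro s hs
      exact ih (fun s a ha hp => h s a (List.mem_cons_of_mem _ ha) hp) (f s b)
        (h s b List.mem_cons_self hs)

theorem foldl_keeps {σ α : Type} (f : σ → α → σ) (l : List α) (P Q : σ → Prop)
    (hP : ∀ s a, a ∈ l → P s → P (f s a))
    (hQ : ∀ s a, a ∈ l → P s → Q s → Q (f s a)) :
    ∀ s, P s → Q s → Q (l.foldl f s) := by
  induction l with
  | nil => intro s _ hq; simpa using hq
  | cons b t ih =>
      intro s hp hq
      exact ih (fun s a ha h => hP s a (List.mem_cons_of_mem _ ha) h)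
        (fun s a ha h1 h2 => hQ s a (List.mem_cons_of_mem _ ha) h1 h2)
        (f s b) (hP s b List.mem_cons_self hp) (hQ s b List.mem_cons_self hp hq)

theorem foldl_marks {σ α : Type} (f : σ → α → σ) (l : List α) (P : σ → Prop) (Q : α → σ → Prop)
    (hP : ∀ s a, a ∈ l → P s → P (f s a))
    (hest : ∀ s a, a ∈ l → P s → Q a (f s a))
    (hkeep : ∀ s a b, b ∈ l → P s → Q a s → Q a (f s b)) :
    ∀ s, P s → ∀ a ∈ l, Q a (l.foldl f s) := by
  induction l with
  | nil => intro s _ a ha; simp at ha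
  | cons b t ih =>
      intro s hp a ha
      have hP' : ∀ s a, a ∈ t → P s → P (f s a) :=
        fun s a ha h => hP s a (List.mem_cons_of_mem _ ha) h
      rcases List.mem_cons.1 ha with rfl | hat
      · exact foldl_keeps f t P (Q a) hP'
          (fun s c hc h1 h2 => hkeep s a c (List.mem_cons_of_mem _ hc) h1 h2)
          (f s a) (hP s a List.mem_cons_self hp) (hest s a List.mem_cons_self hp)
      · exact ih hP' (fun s a ha h => hest s a (List.mem_cons_of_mem _ ha) h)
          (fun s a c hc h1 h2 => hkeep s a c (List.mem_cons_of_mem _ hc) h1 h2)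
          (f s b) (hP s b List.mem_cons_self hp) a hat

-- ---------- grid access ----------
def Shaped {α : Type} (v : List (List α)) (n m : Nat) : Prop :=
  v.length = n ∧ ∀ row ∈ v, row.length = m

theorem getD_grid {α : Type} (f : Nat → Nat → α) (n m r c : Nat) (d : α)
    (hr : r < n) (hc : c < m) :
    (((List.range n).map fun r => (List.range m).map fun c => f r c).getD r []).getD c d
      = f r c := by
  rw [PySem.List.getD_map_range _ _ _ _ hr, PySem.List.getD_map_range _ _ _ _ hc]

theorem shaped_grid {α : Type} (f : Nat → Nat → α) (n m : Nat) :
    Shaped ((List.range n).map fun r => (List.range m).map fun c => f r c) n m := by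
  constructor
  · simp
  · intro row hrow
    simp only [List.mem_map] at hrow
    obtain ⟨r, _, rfl⟩ := hrow
    simp

theorem getD_out {α : Type} {v : List (List α)} {n m : Nat} (h : Shaped v n m)
    {r c : Nat} (hout : n ≤ r ∨ m ≤ c) {d : α} : (v.getD r []).getD c d = d := by
  by_cases hrv : r < v.length
  · have hv := h.1
    have hc : m ≤ c := by
      rcases hout with hr | hc
      · omega
      · exact hc
    have hmem : v.getD r [] ∈ v := by
      rw [List.getD_eq_getElem?_getD, List.getElem?_eq_getElem hrv]
      exact List.getElem_mem hrv
    rw [List.getD_eq_getElem?_getD (l := v.getD r []),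
      List.getElem?_eq_none (by rw [h.2 _ hmem]; exact hc)]
    rfl
  · have hnil : v.getD r [] = [] := by
      rw [List.getD_eq_getElem?_getD, List.getElem?_eq_none (by omega)]
      rfl
    rw [hnil]
    rfl

theorem bget_out {v : List (List Bool)} {n m : Nat} (h : Shaped v n m)
    {r c : Nat} (hout : n ≤ r ∨ m ≤ c) : bget v r c = false := getD_out h hout

theorem bget_lt {e : List (List Bool)} {n m : Nat} (he : Shaped e n m) {r c : Nat}
    (h : bget e r c = true) : r < n ∧ c < m := by
  rcases Nat.lt_or_ge r n with hr | hr
  · rcases Nat.lt_or_ge c m with hc | hc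
    · exact ⟨hr, hc⟩
    · rw [bget_out he (Or.inr hc)] at h; cases h
  · rw [bget_out he (Or.inl hr)] at h; cases h

theorem getD_set_row {α : Type} (v : List (List α)) (r : Nat) (row : List α) (r' : Nat) :
    ((v.set r row).getD r' []) = if r' = r ∧ r < v.length then row else v.getD r' [] := by
  by_cases h2 : r' = r ∧ r < v.length
  · obtain ⟨rfl, hlt⟩ := h2
    rw [if_pos ⟨rfl, hlt⟩, List.getD_eq_getElem?_getD, List.getElem?_set, if_pos rfl, if_pos hlt]
    rfl
  · rw [if_neg h2, List.getD_eq_getElem?_getD, List.getD_eq_getElem?_getD, List.getElem?_set]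
    by_cases h3 : r = r'
    · subst h3
      have hnl : ¬ r < v.length := fun hl => h2 ⟨rfl, hl⟩
      simp [hnl]
    · simp [h3]

theorem setTrue_shape {v : List (List Bool)} {n m : Nat} (h : Shaped v n m) (r c : Nat) :
    Shaped (setTrue v r c) n m := by
  by_cases hr : r < v.length
  · constructor
    · simpa [setTrue] using h.1
    · intro row hrow
      unfold setTrue at hrow
      rcases List.mem_or_eq_of_mem_set hrow with h2 | h2
      · exact h.2 _ h2
      · subst h2
        rw [List.length_set]
        refine h.2 _ ?_
        rw [List.getD_eq_getElem?_getD, List.getElem?_eq_getElem hr]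
        exact List.getElem_mem hr
  · unfold setTrue
    rw [List.set_eq_of_length_le (by omega)]
    exact h

theorem bget_setTrue_self {v : List (List Bool)} {n m : Nat} (h : Shaped v n m)
    {r c : Nat} (hr : r < n) (hc : c < m) : bget (setTrue v r c) r c = true := by
  have hv := h.1
  have hmem : v.getD r [] ∈ v := by
    rw [List.getD_eq_getElem?_getD, List.getElem?_eq_getElem (by omega)]
    exact List.getElem_mem (by omega)
  have hlen : (v.getD r []).length = m := h.2 _ hmem
  unfold bget setTrue
  rw [getD_set_row, if_pos ⟨rfl, by omega⟩, List.getD_eq_getElem?_getD, List.getElem?_set,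
    if_pos rfl, if_pos (show c < (v.getD r []).length by omega)]
  rfl

theorem bget_setTrue_other {v : List (List Bool)} (r c r' c' : Nat)
    (hne : ¬(r' = r ∧ c' = c)) : bget (setTrue v r c) r' c' = bget v r' c' := by
  unfold bget setTrue
  rw [getD_set_row]
  by_cases h1 : r' = r ∧ r < v.length
  · obtain ⟨rfl, h2⟩ := h1
    rw [if_pos ⟨rfl, h2⟩]
    have hcc : ¬ c = c' := fun h => hne ⟨rfl, h.symm⟩
    rw [List.getD_eq_getElem?_getD, List.getElem?_set, if_neg hcc, ← List.getD_eq_getElem?_getD]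
  · rw [if_neg h1]

-- ---------- counting ----------
def fcnt (row : List Bool) : Nat := row.countP (fun b => !b)
def tcnt (row : List Bool) : Nat := row.countP (fun b => b)
def falseCnt (v : List (List Bool)) : Nat := (v.map fcnt).sum
def trueCnt (v : List (List Bool)) : Nat := (v.map tcnt).sum

theorem fcnt_cons (a : Bool) (t : List Bool) : fcnt (a :: t) = fcnt t + if a then 0 else 1 := by
  cases a <;> simp [fcnt]

theorem tcnt_cons (a : Bool) (t : List Bool) : tcnt (a :: t) = tcnt t + if a then 1 else 0 := by
  cases a <;> simp [tcnt]

theorem fcnt_set_true : ∀ (row : List Bool) (c : Nat), c < row.length →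
    row.getD c false = false → fcnt (row.set c true) + 1 = fcnt row := by
  intro row
  induction row with
  | nil => intro c hc; simp at hc
  | cons a t ih =>
      intro c hc hf
      cases c with
      | zero =>
          simp only [List.getD_cons_zero] at hf
          subst hf
          simp only [List.set_cons_zero, fcnt_cons]
          simp
      | succ c =>
          simp only [List.getD_cons_succ] at hf
          simp only [List.set_cons_succ, fcnt_cons]
          have := ih c (by simpa using hc) hf
          omega

theorem tcnt_le_len (row : List Bool) : tcnt row ≤ row.length := List.countP_le_length

theorem fcnt_le_len (row : List Bool) : fcnt row ≤ row.length := List.countP_le_length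

theorem tcnt_full {row : List Bool} (h : row.length ≤ tcnt row) :
    ∀ j, j < row.length → row.getD j false = true := by
  have : tcnt row = row.length := le_antisymm List.countP_le_length h
  have hall := List.countP_eq_length.1 this
  intro j hj
  rw [List.getD_eq_getElem?_getD, List.getElem?_eq_getElem hj]
  simpa using hall _ (List.getElem_mem hj)

theorem tcnt_mono_row : ∀ (l l' : List Bool), l.length = l'.length →
    (∀ j, l.getD j false = true → l'.getD j false = true) → tcnt l ≤ tcnt l' := by
  intro l
  induction l with
  | nil => intro l' _ _; simp [tcnt]
  | cons a t ih =>
      intro l' hlen hmono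
      cases l' with
      | nil => simp at hlen
      | cons b s =>
          have h0 : a = true → b = true := by simpa using hmono 0
          have ht : tcnt t ≤ tcnt s :=
            ih s (by simpa using hlen) (fun j h => by simpa using hmono (j + 1) (by simpa using h))
          rw [tcnt_cons, tcnt_cons]
          cases a
          · simp; omega
          · rw [h0 rfl]; omega

theorem tcnt_strict_row : ∀ (l l' : List Bool), l.length = l'.length →
    (∀ j, l.getD j false = true → l'.getD j false = true) → l ≠ l' → tcnt l < tcnt l' := by
  intro l
  induction l with
  | nil => intro l' hlen _ hne; cases l' <;> simp_all
  | cons a t ih =>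
      intro l' hlen hmono hne
      cases l' with
      | nil => simp at hlen
      | cons b s =>
          have h0 : a = true → b = true := by simpa using hmono 0
          have hmt : ∀ j, t.getD j false = true → s.getD j false = true :=
            fun j h => by simpa using hmono (j + 1) (by simpa using h)
          have hlen' : t.length = s.length := by simpa using hlen
          have hmle : tcnt t ≤ tcnt s := tcnt_mono_row t s hlen' hmt
          rw [tcnt_cons, tcnt_cons]
          by_cases hab : a = b
          · subst hab
            have hts : t ≠ s := fun h => hne (by rw [h])
            have := ih s hlen' hmt hts
            omega
          · cases a
            · cases b
              · exact absurd rfl hab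
              · simp; omega
            · exact absurd (h0 rfl) (fun h => hab h.symm)

theorem shaped_tail {a : List Bool} {t : List (List Bool)} {n m : Nat}
    (h : Shaped (a :: t) n m) : Shaped t t.length m :=
  ⟨rfl, fun _ hr => h.2 _ (List.mem_cons_of_mem _ hr)⟩

theorem trueCnt_mono : ∀ (v w : List (List Bool)) (n m : Nat), Shaped v n m → Shaped w n m →
    (∀ r c, bget v r c = true → bget w r c = true) → trueCnt v ≤ trueCnt w := by
  intro v
  induction v with
  | nil => intro w n m _ _ _; simp [trueCnt]
  | cons a t ih =>
      intro w n m hv hw hmono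
      cases w with
      | nil =>
          have h1 := hv.1; have h2 := hw.1
          simp at h1 h2; omega
      | cons b s =>
          have h1 := hv.1; have h2 := hw.1
          simp at h1 h2
          have hrow : tcnt a ≤ tcnt b := by
            refine tcnt_mono_row a b ?_ ?_
            · rw [hv.2 a List.mem_cons_self, hw.2 b List.mem_cons_self]
            · intro j hj
              simpa [bget] using hmono 0 j (by simpa [bget] using hj)
          have htail : trueCnt t ≤ trueCnt s := by
            refine ih s t.length m (shaped_tail hv) ⟨by omega, (shaped_tail hw).2⟩ ?_
            intro r c hx
            simpa [bget] using hmono (r + 1) c (by simpa [bget] using hx)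
          simp only [trueCnt, List.map_cons, List.sum_cons]
          simp only [trueCnt] at htail
          omega

theorem trueCnt_le : ∀ (v : List (List Bool)) (n m : Nat), Shaped v n m → trueCnt v ≤ n * m := by
  intro v
  induction v with
  | nil => intro n m _; simp [trueCnt]
  | cons a t ih =>
      intro n m h
      have hn : n = t.length + 1 := by simpa using h.1.symm
      have h1 : tcnt a ≤ m := by
        have := tcnt_le_len a
        rwa [h.2 a List.mem_cons_self] at this
      have h2 : trueCnt t ≤ t.length * m := ih t.length m (shaped_tail h)
      simp only [trueCnt, List.map_cons, List.sum_cons]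
      simp only [trueCnt] at h2
      subst hn
      nlinarith

theorem falseCnt_le : ∀ (v : List (List Bool)) (n m : Nat), Shaped v n m → falseCnt v ≤ n * m := by
  intro v
  induction v with
  | nil => intro n m _; simp [falseCnt]
  | cons a t ih =>
      intro n m h
      have hn : n = t.length + 1 := by simpa using h.1.symm
      have h1 : fcnt a ≤ m := by
        have := fcnt_le_len a
        rwa [h.2 a List.mem_cons_self] at this
      have h2 : falseCnt t ≤ t.length * m := ih t.length m (shaped_tail h)
      simp only [falseCnt, List.map_cons, List.sum_cons]
      simp only [falseCnt] at h2
      subst hn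
      nlinarith

theorem falseCnt_setTrue : ∀ (v : List (List Bool)) (n m : Nat), Shaped v n m →
    ∀ (r c : Nat), r < n → c < m → bget v r c = false →
    falseCnt (setTrue v r c) + 1 = falseCnt v := by
  intro v
  induction v with
  | nil => intro n m h r c hr _ _; rw [← h.1] at hr; simp at hr
  | cons a t ih =>
      intro n m h r c hr hc hf
      cases r with
      | zero =>
          have hlen : a.length = m := h.2 a List.mem_cons_self
          have hst : setTrue (a :: t) 0 c = a.set c true :: t := by simp [setTrue]
          rw [hst]
          simp only [falseCnt, List.map_cons, List.sum_cons]
          have := fcnt_set_true a c (by omega) (by simpa [bget] using hf)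
          omega
      | succ r =>
          have hn : n = t.length + 1 := by simpa using h.1.symm
          have hst : setTrue (a :: t) (r + 1) c = a :: setTrue t r c := by simp [setTrue]
          rw [hst]
          simp only [falseCnt, List.map_cons, List.sum_cons]
          have := ih t.length m (shaped_tail h) r c (by omega) hc (by simpa [bget] using hf)
          simp only [falseCnt] at this
          omega

theorem all_of_trueCnt_full : ∀ (v : List (List Bool)) (n m : Nat), Shaped v n m →
    n * m ≤ trueCnt v → ∀ r c, r < n → c < m → bget v r c = true := by
  intro v
  induction v with
  | nil => intro n m h _ r c hr _; rw [← h.1] at hr; simp at hr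
  | cons a t ih =>
      intro n m h hfull r c hr hc
      have hn : n = t.length + 1 := by simpa using h.1.symm
      have hsh := shaped_tail h
      have h1 : tcnt a ≤ m := by
        have := tcnt_le_len a
        rwa [h.2 a List.mem_cons_self] at this
      have h2 : trueCnt t ≤ t.length * m := trueCnt_le t t.length m hsh
      have hsum : trueCnt (a :: t) = tcnt a + trueCnt t := by
        simp [trueCnt]
      rw [hsum] at hfull
      cases r with
      | zero =>
          have hm : m ≤ tcnt a := by subst hn; nlinarith
          have := tcnt_full (by rw [h.2 a List.mem_cons_self]; exact hm) c
            (by rw [h.2 a List.mem_cons_self]; exact hc)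
          simpa [bget] using this
      | succ r =>
          have hm : t.length * m ≤ trueCnt t := by subst hn; nlinarith
          have := ih t.length m hsh hm r c (by omega) hc
          simpa [bget] using this

theorem trueCnt_lt_of_mono_ne : ∀ (v w : List (List Bool)) (n m : Nat),
    Shaped v n m → Shaped w n m →
    (∀ r c, bget v r c = true → bget w r c = true) → w ≠ v →
    trueCnt v < trueCnt w := by
  intro v
  induction v with
  | nil =>
      intro w n m hv hw _ hne
      cases w with
      | nil => exact absurd rfl hne
      | cons b s =>
          have h1 := hv.1; have h2 := hw.1
          simp at h1 h2; omega
  | cons a t ih =>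
      intro w n m hv hw hmono hne
      cases w with
      | nil =>
          have h1 := hv.1; have h2 := hw.1
          simp at h1 h2; omega
      | cons b s =>
          have h1 := hv.1; have h2 := hw.1
          simp at h1 h2
          have hlent : t.length = s.length := by omega
          have hsv := shaped_tail hv
          have hsw : Shaped s t.length m := ⟨hlent.symm, (shaped_tail hw).2⟩
          have hrowmono : ∀ j, a.getD j false = true → b.getD j false = true := by
            intro j hj
            simpa [bget] using hmono 0 j (by simpa [bget] using hj)
          have hrowlen : a.length = b.length := by
            rw [hv.2 a List.mem_cons_self, hw.2 b List.mem_cons_self]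
          have htmono : ∀ r c, bget t r c = true → bget s r c = true := by
            intro r c hx
            simpa [bget] using hmono (r + 1) c (by simpa [bget] using hx)
          have htail : trueCnt t ≤ trueCnt s := trueCnt_mono t s t.length m hsv hsw htmono
          simp only [trueCnt, List.map_cons, List.sum_cons]
          simp only [trueCnt] at htail
          by_cases hab : b = a
          · subst hab
            have hts : s ≠ t := fun hh => hne (by rw [hh])
            have := ih s t.length m hsv hsw htmono hts
            simp only [trueCnt] at this
            omega
          · have hrne : a ≠ b := fun hh => hab hh.symm
            have := tcnt_strict_row a b hrowlen hrowmono hrne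
            omega

-- ---------- the external-reachability relation both programs compute ----------
inductive ExtP (g : List (List Char)) (n m : Nat) : Nat → Nat → Prop where
  | base (r c : Nat) : r < n → c < m → (r = 0 ∨ r = n - 1 ∨ c = 0 ∨ c = m - 1) →
      cget g r c = '.' → ExtP g n m r c
  | down (r c : Nat) : ExtP g n m r c → r + 1 < n → cget g (r + 1) c = '.' → ExtP g n m (r + 1) c
  | up (r c : Nat) : ExtP g n m (r + 1) c → cget g r c = '.' → ExtP g n m r c
  | right (r c : Nat) : ExtP g n m r c → c + 1 < m → cget g r (c + 1) = '.' → ExtP g n m r (c + 1)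
  | left (r c : Nat) : ExtP g n m r (c + 1) → cget g r c = '.' → ExtP g n m r c

theorem extP_lt {g n m r c} (h : ExtP g n m r c) : r < n ∧ c < m ∧ cget g r c = '.' := by
  induction h with
  | base r c h1 h2 _ h4 => exact ⟨h1, h2, h4⟩
  | down r c _ h2 h3 ih => exact ⟨h2, ih.2.1, h3⟩
  | up r c _ h2 ih => exact ⟨by omega, ih.2.1, h2⟩
  | right r c _ h2 h3 ih => exact ⟨ih.1, h2, h3⟩
  | left r c _ h2 ih => exact ⟨ih.1, by omega, h2⟩

theorem extP_congr {gA gB : List (List Char)} {n m : Nat}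
    (hpt : ∀ r c, r < n → c < m → cget gA r c = cget gB r c) :
    ∀ r c, ExtP gA n m r c → ExtP gB n m r c := by
  intro r c h
  induction h with
  | base r c h1 h2 h3 h4 =>
      refine ExtP.base r c h1 h2 h3 ?_
      rw [← hpt r c h1 h2]; exact h4
  | down r c h h2 h3 ih => exact ExtP.down r c ih h2 (by rw [← hpt _ _ h2 (extP_lt h).2.1]; exact h3)
  | up r c h h2 ih =>
      have := extP_lt h
      exact ExtP.up r c ih (by rw [← hpt _ _ (by omega) this.2.1]; exact h2)
  | right r c h h2 h3 ih => exact ExtP.right r c ih h2 (by rw [← hpt _ _ (extP_lt h).1 h2]; exact h3)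
  | left r c h h2 ih =>
      have := extP_lt h
      exact ExtP.left r c ih (by rw [← hpt _ _ this.1 (by omega)]; exact h2)

def SoundE (g : List (List Char)) (n m : Nat) (e : List (List Bool)) : Prop :=
  ∀ r c, bget e r c = true → ExtP g n m r c

def SeededE (g : List (List Char)) (n m : Nat) (e : List (List Bool)) : Prop :=
  ∀ r c, r < n → c < m → (r = 0 ∨ r = n - 1 ∨ c = 0 ∨ c = m - 1) → cget g r c = '.' →
    bget e r c = true

def ClosedE (g : List (List Char)) (n m : Nat) (e : List (List Bool)) : Prop :=
  ∀ r c, r < n → c < m → cget g r c = '.' → nearB n m e r c = true → bget e r c = true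

theorem char_of {g : List (List Char)} {n m : Nat} {e : List (List Bool)}
    (hs : SoundE g n m e) (hseed : SeededE g n m e) (hcl : ClosedE g n m e) :
    ∀ r c, bget e r c = true ↔ ExtP g n m r c := by
  intro r c
  constructor
  · exact hs r c
  · intro h
    induction h with
    | base r c h1 h2 h3 h4 => exact hseed r c h1 h2 h3 h4
    | down r c h h2 h3 ih =>
        refine hcl _ _ h2 (extP_lt h).2.1 h3 ?_
        have hb : bget e r c = true := ih
        unfold nearB
        simp only [Bool.or_eq_true, Bool.and_eq_true, decide_eq_true_eq]
        exact Or.inl (Or.inl (Or.inl ⟨by omega, by simpa using hb⟩))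
    | up r c h h2 ih =>
        have hlt := extP_lt h
        refine hcl _ _ (by omega) hlt.2.1 h2 ?_
        unfold nearB
        simp only [Bool.or_eq_true, Bool.and_eq_true, decide_eq_true_eq]
        exact Or.inl (Or.inl (Or.inr ⟨hlt.1, ih⟩))
    | right r c h h2 h3 ih =>
        refine hcl _ _ (extP_lt h).1 h2 h3 ?_
        unfold nearB
        simp only [Bool.or_eq_true, Bool.and_eq_true, decide_eq_true_eq]
        exact Or.inl (Or.inr ⟨by omega, by simpa using ih⟩)
    | left r c h h2 ih =>
        have hlt := extP_lt h
        refine hcl _ _ hlt.1 (by omega) h2 ?_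
        unfold nearB
        simp only [Bool.or_eq_true, Bool.and_eq_true, decide_eq_true_eq]
        exact Or.inr ⟨hlt.2.1, ih⟩

-- ---------- B side: saturation ----------
theorem bget_extStepB {g n m e r c} (hr : r < n) (hc : c < m) :
    bget (extStepB g n m e) r c
      = (bget e r c || (decide (cget g r c = '.') && nearB n m e r c)) := by
  unfold extStepB bget
  exact getD_grid _ n m r c false hr hc

theorem extStepB_shape (g : List (List Char)) (n m : Nat) (e : List (List Bool)) :
    Shaped (extStepB g n m e) n m := shaped_grid _ n m

theorem extStepB_mono {g n m e} (he : Shaped e n m) :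
    ∀ r c, bget e r c = true → bget (extStepB g n m e) r c = true := by
  intro r c h
  rcases Nat.lt_or_ge r n with hr | hr
  · rcases Nat.lt_or_ge c m with hc | hc
    · rw [bget_extStepB hr hc, h]; rfl
    · rw [bget_out he (Or.inr hc)] at h; cases h
  · rw [bget_out he (Or.inl hr)] at h; cases h

theorem extStepB_sound {g n m e} (hs : SoundE g n m e) :
    SoundE g n m (extStepB g n m e) := by
  intro r c h
  obtain ⟨hr, hc⟩ := bget_lt (extStepB_shape g n m e) h
  rw [bget_extStepB hr hc] at h
  simp only [Bool.or_eq_true, Bool.and_eq_true, decide_eq_true_eq] at h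
  rcases h with h1 | ⟨hdot', hnear⟩
  · exact hs _ _ h1
  · unfold nearB at hnear
    simp only [Bool.or_eq_true, Bool.and_eq_true, decide_eq_true_eq] at hnear
    rcases hnear with ((⟨h2, h3⟩ | ⟨h2, h3⟩) | ⟨h2, h3⟩) | ⟨h2, h3⟩
    · have hE := hs _ _ h3
      have := ExtP.down (r - 1) c hE (by omega)
        (by rw [show r - 1 + 1 = r by omega]; exact hdot')
      rwa [show r - 1 + 1 = r by omega] at this
    · exact ExtP.up r c (hs _ _ h3) hdot'
    · have hE := hs _ _ h3
      have := ExtP.right r (c - 1) hE (by omega)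
        (by rw [show c - 1 + 1 = c by omega]; exact hdot')
      rwa [show c - 1 + 1 = c by omega] at this
    · exact ExtP.left r c (hs _ _ h3) hdot'

theorem iterFixB_succ (f : List (List Bool) → List (List Bool)) (k : Nat) (e : List (List Bool)) :
    iterFixB f (k + 1) e = if f e = e then e else iterFixB f k (f e) := rfl

theorem iterFixB_pres (f : List (List Bool) → List (List Bool))
    (P : List (List Bool) → Prop) (hf : ∀ e, P e → P (f e)) :
    ∀ k e, P e → P (iterFixB f k e) := by
  intro k
  induction k with
  | zero => intro e he; exact he
  | succ k ih =>
      intro e he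
      rw [iterFixB_succ]
      by_cases h : f e = e
      · rw [if_pos h]
        exact he
      · rw [if_neg h]
        exact ih (f e) (hf e he)

theorem iterFixB_closed {g : List (List Char)} {n m : Nat} :
    ∀ (k : Nat) (e : List (List Bool)), Shaped e n m → n * m ≤ k + trueCnt e →
      ClosedE g n m (iterFixB (extStepB g n m) k e) := by
  intro k
  induction k with
  | zero =>
      intro e hsh hcnt r c hr hc _ _
      exact all_of_trueCnt_full e n m hsh (by omega) r c hr hc
  | succ k ih =>
      intro e hsh hcnt
      by_cases hfix : extStepB g n m e = e
      · rw [iterFixB_succ, if_pos hfix]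
        intro r c hr hc hdot hnear
        have heq := bget_extStepB (g := g) (e := e) hr hc
        rw [hfix] at heq
        rw [heq, hdot]
        simp [hnear]
      · rw [iterFixB_succ, if_neg hfix]
        refine ih (extStepB g n m e) (extStepB_shape g n m e) ?_
        have hlt : trueCnt e < trueCnt (extStepB g n m e) :=
          trueCnt_lt_of_mono_ne e (extStepB g n m e) n m hsh (extStepB_shape g n m e)
            (extStepB_mono hsh) hfix
        omega

theorem externalB_char {g : List (List Char)} {n m : Nat} :
    ∀ r c, bget (externalB g n m) r c = true ↔ ExtP g n m r c := by
  have hsh0 : Shaped ((List.range n).map fun r => (List.range m).map fun c =>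
      decide (cget g r c = '.') && borderB n m r c) n m := shaped_grid _ n m
  have hs0 : SoundE g n m ((List.range n).map fun r => (List.range m).map fun c =>
      decide (cget g r c = '.') && borderB n m r c) := by
    intro r c h
    obtain ⟨hr, hc⟩ := bget_lt hsh0 h
    unfold bget at h
    rw [getD_grid _ n m r c false hr hc] at h
    simp only [Bool.and_eq_true] at h
    obtain ⟨hdot, hbord⟩ := h
    unfold borderB at hbord
    simp only [Bool.or_eq_true, decide_eq_true_eq] at hbord
    refine ExtP.base r c hr hc ?_ (of_decide_eq_true hdot)
    tauto
  have hseed0 : SeededE g n m ((List.range n).map fun r => (List.range m).map fun c =>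
      decide (cget g r c = '.') && borderB n m r c) := by
    intro r c hr hc hbord hdot
    unfold bget
    rw [getD_grid _ n m r c false hr hc, hdot]
    unfold borderB
    simp only [decide_true, Bool.true_and, Bool.or_eq_true, decide_eq_true_eq]
    tauto
  have hpres : ∀ e, (Shaped e n m ∧ SoundE g n m e ∧ SeededE g n m e) →
      (Shaped (extStepB g n m e) n m ∧ SoundE g n m (extStepB g n m e) ∧
        SeededE g n m (extStepB g n m e)) := by
    intro e ⟨h1, h2, h3⟩
    exact ⟨extStepB_shape g n m e, extStepB_sound h2,
      fun r c hr hc hb hd => extStepB_mono h1 r c (h3 r c hr hc hb hd)⟩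
  have hP := iterFixB_pres (extStepB g n m) _ hpres (n * m) _ ⟨hsh0, hs0, hseed0⟩
  have hcl : ClosedE g n m (externalB g n m) :=
    iterFixB_closed (n * m) _ hsh0 (by omega)
  exact char_of hP.2.1 hP.2.2 hcl

-- ---------- A side: BFS ----------
def Adj (r c r' c' : Nat) : Prop :=
  (c' = c ∧ (r' = r + 1 ∨ r' + 1 = r)) ∨ (r' = r ∧ (c' = c + 1 ∨ c' + 1 = c))

theorem nearB_iff {n m : Nat} {e : List (List Bool)} (he : Shaped e n m) (r c : Nat) :
    nearB n m e r c = true ↔ ∃ r' c', Adj r c r' c' ∧ bget e r' c' = true := by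
  unfold nearB
  simp only [Bool.or_eq_true, Bool.and_eq_true, decide_eq_true_eq]
  constructor
  · rintro (((⟨h1, h2⟩ | ⟨h1, h2⟩) | ⟨h1, h2⟩) | ⟨h1, h2⟩)
    · exact ⟨r - 1, c, Or.inl ⟨rfl, Or.inr (by omega)⟩, h2⟩
    · exact ⟨r + 1, c, Or.inl ⟨rfl, Or.inl rfl⟩, h2⟩
    · exact ⟨r, c - 1, Or.inr ⟨rfl, Or.inr (by omega)⟩, h2⟩
    · exact ⟨r, c + 1, Or.inr ⟨rfl, Or.inl rfl⟩, h2⟩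
  · rintro ⟨r', c', hadj, hb⟩
    obtain ⟨hr', hc'⟩ := bget_lt he hb
    rcases hadj with ⟨rfl, h | h⟩ | ⟨rfl, h | h⟩
    · subst h
      exact Or.inl (Or.inl (Or.inr ⟨hr', hb⟩))
    · refine Or.inl (Or.inl (Or.inl ⟨by omega, ?_⟩))
      rw [show r - 1 = r' by omega]
      exact hb
    · subst h
      exact Or.inr ⟨hc', hb⟩
    · refine Or.inl (Or.inr ⟨by omega, ?_⟩)
      rw [show c - 1 = c' by omega]
      exact hb

def InvA (g : List (List Char)) (n m : Nat) (v : List (List Bool)) (q : List (Nat × Nat)) : Prop :=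
  Shaped v n m ∧ SoundE g n m v ∧ (∀ p ∈ q, bget v p.1 p.2 = true) ∧
  (∀ r c, bget v r c = true → (r, c) ∉ q →
    ∀ r' c', r' < n → c' < m → Adj r c r' c' → cget g r' c' = '.' → bget v r' c' = true)

theorem adj_symm {r c r' c' : Nat} (h : Adj r c r' c') : Adj r' c' r c := by
  unfold Adj at h ⊢
  omega

theorem bget_setTrue_mono {v : List (List Bool)} {n m : Nat} (h : Shaped v n m)
    {r c : Nat} (hr : r < n) (hc : c < m) :
    ∀ a b, bget v a b = true → bget (setTrue v r c) a b = true := by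
  intro a b hab
  by_cases hx : a = r ∧ b = c
  · obtain ⟨rfl, rfl⟩ := hx
    exact bget_setTrue_self h hr hc
  · rw [bget_setTrue_other r c a b hx]
    exact hab

theorem stepOneA_props {g : List (List Char)} {n m : Nat}
    (S : List (List Bool) × List (Nat × Nat)) (nr nc : Int)
    (hsh : Shaped S.1 n m) (hsound : SoundE g n m S.1)
    (hq : ∀ p ∈ S.2, bget S.1 p.1 p.2 = true)
    (hext : 0 ≤ nr → nr < (n : Int) → 0 ≤ nc → nc < (m : Int) →
      cget g nr.toNat nc.toNat = '.' → ExtP g n m nr.toNat nc.toNat) :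
    Shaped (stepOneA g n m S nr nc).1 n m ∧ SoundE g n m (stepOneA g n m S nr nc).1 ∧
    (∀ p ∈ (stepOneA g n m S nr nc).2, bget (stepOneA g n m S nr nc).1 p.1 p.2 = true) ∧
    falseCnt (stepOneA g n m S nr nc).1 + (stepOneA g n m S nr nc).2.length
      = falseCnt S.1 + S.2.length ∧
    (∀ a b, bget S.1 a b = true → bget (stepOneA g n m S nr nc).1 a b = true) ∧
    (∀ p ∈ S.2, p ∈ (stepOneA g n m S nr nc).2) ∧
    (∀ a b, bget (stepOneA g n m S nr nc).1 a b = true →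
      bget S.1 a b = true ∨ (a, b) ∈ (stepOneA g n m S nr nc).2) ∧
    ((0 ≤ nr ∧ nr < (n : Int) ∧ 0 ≤ nc ∧ nc < (m : Int) ∧ cget g nr.toNat nc.toNat = '.') →
      bget (stepOneA g n m S nr nc).1 nr.toNat nc.toNat = true) := by
  by_cases hcond : (inRangeA n m nr nc && !bget S.1 nr.toNat nc.toNat
      && decide (cget g nr.toNat nc.toNat = '.')) = true
  · have hres : stepOneA g n m S nr nc
        = (setTrue S.1 nr.toNat nc.toNat, S.2 ++ [(nr.toNat, nc.toNat)]) := by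
      unfold stepOneA
      rw [if_pos hcond]
    simp only [Bool.and_eq_true, Bool.not_eq_true', inRangeA, decide_eq_true_eq] at hcond
    obtain ⟨⟨⟨⟨⟨h1, h2⟩, h3⟩, h4⟩, hnv⟩, hdot⟩ := hcond
    have ha : nr.toNat < n := by omega
    have hb : nc.toNat < m := by omega
    have hE : ExtP g n m nr.toNat nc.toNat := hext h1 h2 h3 h4 hdot
    have hmono := bget_setTrue_mono hsh ha hb
    rw [hres]
    refine ⟨setTrue_shape hsh _ _, ?_, ?_, ?_, hmono, ?_, ?_, ?_⟩
    · intro a b hab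
      by_cases hx : a = nr.toNat ∧ b = nc.toNat
      · obtain ⟨rfl, rfl⟩ := hx
        exact hE
      · rw [bget_setTrue_other _ _ _ _ hx] at hab
        exact hsound _ _ hab
    · intro p hp
      rcases List.mem_append.1 hp with hp | hp
      · exact hmono _ _ (hq _ hp)
      · simp at hp
        subst hp
        exact bget_setTrue_self hsh ha hb
    · have := falseCnt_setTrue S.1 n m hsh nr.toNat nc.toNat ha hb hnv
      simp only [List.length_append, List.length_cons, List.length_nil]
      omega
    · intro p hp
      exact List.mem_append_left _ hp
    · intro a b hab
      by_cases hx : a = nr.toNat ∧ b = nc.toNat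
      · obtain ⟨rfl, rfl⟩ := hx
        exact Or.inr (List.mem_append_right _ (by simp))
      · rw [bget_setTrue_other _ _ _ _ hx] at hab
        exact Or.inl hab
    · intro _
      exact bget_setTrue_self hsh ha hb
  · have hres : stepOneA g n m S nr nc = S := by
      unfold stepOneA
      rw [if_neg hcond]
    rw [hres]
    refine ⟨hsh, hsound, hq, rfl, fun _ _ h => h, fun _ h => h, fun _ _ h => Or.inl h, ?_⟩
    rintro ⟨h1, h2, h3, h4, hdot⟩
    by_contra hfalse
    apply hcond
    simp only [Bool.and_eq_true, Bool.not_eq_true', inRangeA, decide_eq_true_eq]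
    exact ⟨⟨⟨⟨⟨h1, h2⟩, h3⟩, h4⟩, by cases hb : bget S.1 nr.toNat nc.toNat
                                     · rfl
                                     · exact absurd hb hfalse⟩, hdot⟩

theorem bfs_fold_props {g : List (List Char)} {n m : Nat} {v : List (List Bool)}
    {q : List (Nat × Nat)} {r c : Nat}
    (hinv : InvA g n m v ((r, c) :: q)) :
    InvA g n m (dirsA.foldl (fun st d => stepOneA g n m st ((r : Int) + d.1) ((c : Int) + d.2)) (v, q)).1
      (dirsA.foldl (fun st d => stepOneA g n m st ((r : Int) + d.1) ((c : Int) + d.2)) (v, q)).2 ∧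
    falseCnt (dirsA.foldl (fun st d => stepOneA g n m st ((r : Int) + d.1) ((c : Int) + d.2)) (v, q)).1
        + (dirsA.foldl (fun st d => stepOneA g n m st ((r : Int) + d.1) ((c : Int) + d.2)) (v, q)).2.length + 1
      = falseCnt v + ((r, c) :: q).length ∧
    (∀ r0 c0, bget v r0 c0 = true →
      bget (dirsA.foldl (fun st d => stepOneA g n m st ((r : Int) + d.1) ((c : Int) + d.2)) (v, q)).1 r0 c0 = true) := by
  obtain ⟨hsh, hsound, hq, hfront⟩ := hinv
  have hvrc : bget v r c = true := hq (r, c) List.mem_cons_self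
  obtain ⟨hrn, hcm⟩ := bget_lt hsh hvrc
  have hrcE : ExtP g n m r c := hsound _ _ hvrc
  -- the four neighbour soundness facts
  have hext1 : 0 ≤ (r : Int) + -1 → (r : Int) + -1 < (n : Int) → 0 ≤ (c : Int) + 0 →
      (c : Int) + 0 < (m : Int) → cget g ((r : Int) + -1).toNat ((c : Int) + 0).toNat = '.' →
      ExtP g n m ((r : Int) + -1).toNat ((c : Int) + 0).toNat := by
    intro h1 _ _ _ hdot
    rw [show ((r : Int) + -1).toNat = r - 1 by omega, show ((c : Int) + 0).toNat = c by omega] at hdot ⊢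
    exact ExtP.up (r - 1) c (by rw [show r - 1 + 1 = r by omega]; exact hrcE) hdot
  have hext2 : 0 ≤ (r : Int) + 1 → (r : Int) + 1 < (n : Int) → 0 ≤ (c : Int) + 0 →
      (c : Int) + 0 < (m : Int) → cget g ((r : Int) + 1).toNat ((c : Int) + 0).toNat = '.' →
      ExtP g n m ((r : Int) + 1).toNat ((c : Int) + 0).toNat := by
    intro _ h2 _ _ hdot
    rw [show ((r : Int) + 1).toNat = r + 1 by omega, show ((c : Int) + 0).toNat = c by omega] at hdot ⊢
    exact ExtP.down r c hrcE (by omega) hdot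
  have hext3 : 0 ≤ (r : Int) + 0 → (r : Int) + 0 < (n : Int) → 0 ≤ (c : Int) + -1 →
      (c : Int) + -1 < (m : Int) → cget g ((r : Int) + 0).toNat ((c : Int) + -1).toNat = '.' →
      ExtP g n m ((r : Int) + 0).toNat ((c : Int) + -1).toNat := by
    intro _ _ h3 _ hdot
    rw [show ((r : Int) + 0).toNat = r by omega, show ((c : Int) + -1).toNat = c - 1 by omega] at hdot ⊢
    exact ExtP.left r (c - 1) (by rw [show c - 1 + 1 = c by omega]; exact hrcE) hdot
  have hext4 : 0 ≤ (r : Int) + 0 → (r : Int) + 0 < (n : Int) → 0 ≤ (c : Int) + 1 →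
      (c : Int) + 1 < (m : Int) → cget g ((r : Int) + 0).toNat ((c : Int) + 1).toNat = '.' →
      ExtP g n m ((r : Int) + 0).toNat ((c : Int) + 1).toNat := by
    intro _ _ _ h4 hdot
    rw [show ((r : Int) + 0).toNat = r by omega, show ((c : Int) + 1).toNat = c + 1 by omega] at hdot ⊢
    exact ExtP.right r c hrcE (by omega) hdot
  have hqt : ∀ p ∈ q, bget v p.1 p.2 = true := fun p hp => hq _ (List.mem_cons_of_mem _ hp)
  obtain ⟨sh1, so1, hq1, mu1, mo1, qs1, nv1, mk1⟩ :=
    stepOneA_props (g := g) (v, q) ((r : Int) + -1) ((c : Int) + 0) hsh hsound hqt hext1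
  obtain ⟨sh2, so2, hq2, mu2, mo2, qs2, nv2, mk2⟩ :=
    stepOneA_props (g := g) _ ((r : Int) + 1) ((c : Int) + 0) sh1 so1 hq1 hext2
  obtain ⟨sh3, so3, hq3, mu3, mo3, qs3, nv3, mk3⟩ :=
    stepOneA_props (g := g) _ ((r : Int) + 0) ((c : Int) + -1) sh2 so2 hq2 hext3
  obtain ⟨sh4, so4, hq4, mu4, mo4, qs4, nv4, mk4⟩ :=
    stepOneA_props (g := g) _ ((r : Int) + 0) ((c : Int) + 1) sh3 so3 hq3 hext4
  have hfoldeq : dirsA.foldl (fun st d => stepOneA g n m st ((r : Int) + d.1) ((c : Int) + d.2)) (v, q)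
      = stepOneA g n m (stepOneA g n m (stepOneA g n m (stepOneA g n m (v, q)
          ((r : Int) + -1) ((c : Int) + 0)) ((r : Int) + 1) ((c : Int) + 0))
          ((r : Int) + 0) ((c : Int) + -1)) ((r : Int) + 0) ((c : Int) + 1) := rfl
  rw [hfoldeq]
  set S1 := stepOneA g n m (v, q) ((r : Int) + -1) ((c : Int) + 0) with hS1
  set S2 := stepOneA g n m S1 ((r : Int) + 1) ((c : Int) + 0) with hS2
  set S3 := stepOneA g n m S2 ((r : Int) + 0) ((c : Int) + -1) with hS3
  set S4 := stepOneA g n m S3 ((r : Int) + 0) ((c : Int) + 1) with hS4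
  have mono14 : ∀ a b, bget v a b = true → bget S4.1 a b = true :=
    fun a b h => mo4 _ _ (mo3 _ _ (mo2 _ _ (mo1 _ _ h)))
  have qsup14 : ∀ p, p ∈ q → p ∈ S4.2 :=
    fun p h => qs4 _ (qs3 _ (qs2 _ (qs1 _ h)))
  have new14 : ∀ a b, bget S4.1 a b = true → bget v a b = true ∨ (a, b) ∈ S4.2 := by
    intro a b h
    rcases nv4 _ _ h with h | h
    · rcases nv3 _ _ h with h | h
      · rcases nv2 _ _ h with h | h
        · rcases nv1 _ _ h with h | h
          · exact Or.inl h
          · exact Or.inr (qs4 _ (qs3 _ (qs2 _ h)))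
        · exact Or.inr (qs4 _ (qs3 _ h))
      · exact Or.inr (qs4 _ h)
    · exact Or.inr h
  have mu1' : falseCnt S1.1 + S1.2.length = falseCnt v + q.length := mu1
  refine ⟨⟨sh4, so4, hq4, ?_⟩, by simp only [List.length_cons]; omega, mono14⟩
  -- frontier
  intro a b hab hnotin a' b' ha' hb' hadj hdot
  rcases new14 a b hab with hold | hin
  · by_cases hrc : a = r ∧ b = c
    · obtain ⟨rfl, rfl⟩ := hrc
      -- neighbours of the popped cell are all marked
      rcases hadj with ⟨rfl, hh | hh⟩ | ⟨rfl, hh | hh⟩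
      · -- a' = a + 1
        subst hh
        have := mk2 ⟨by omega, by omega, by omega, by omega,
          by rw [show ((a : Int) + 1).toNat = a + 1 by omega, show ((b' : Int) + 0).toNat = b' by omega]; exact hdot⟩
        rw [show ((a : Int) + 1).toNat = a + 1 by omega, show ((b' : Int) + 0).toNat = b' by omega] at this
        exact mo4 _ _ (mo3 _ _ this)
      · -- a' + 1 = a
        have := mk1 ⟨by omega, by omega, by omega, by omega,
          by rw [show ((a : Int) + -1).toNat = a - 1 by omega, show ((b' : Int) + 0).toNat = b' by omega,
            show a - 1 = a' by omega]; exact hdot⟩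
        rw [show ((a : Int) + -1).toNat = a - 1 by omega, show ((b' : Int) + 0).toNat = b' by omega,
          show a - 1 = a' by omega] at this
        exact mo4 _ _ (mo3 _ _ (mo2 _ _ this))
      · -- b' = b + 1
        subst hh
        have := mk4 ⟨by omega, by omega, by omega, by omega,
          by rw [show ((a' : Int) + 0).toNat = a' by omega, show ((b : Int) + 1).toNat = b + 1 by omega]; exact hdot⟩
        rw [show ((a' : Int) + 0).toNat = a' by omega, show ((b : Int) + 1).toNat = b + 1 by omega] at this
        exact this
      · -- b' + 1 = b
        have := mk3 ⟨by omega, by omega, by omega, by omega,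
          by rw [show ((a' : Int) + 0).toNat = a' by omega, show ((b : Int) + -1).toNat = b - 1 by omega,
            show b - 1 = b' by omega]; exact hdot⟩
        rw [show ((a' : Int) + 0).toNat = a' by omega, show ((b : Int) + -1).toNat = b - 1 by omega,
          show b - 1 = b' by omega] at this
        exact mo4 _ _ this
    · have hnq : (a, b) ∉ (r, c) :: q := by
        intro hmem
        rcases List.mem_cons.1 hmem with hh | hh
        · exact hrc ⟨congrArg Prod.fst hh, congrArg Prod.snd hh⟩
        · exact hnotin (qsup14 _ hh)
      exact mono14 _ _ (hfront a b hold hnq a' b' ha' hb' hadj hdot)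
  · exact absurd hin hnotin

theorem bfsAuxA_run {g : List (List Char)} {n m : Nat} :
    ∀ (fuel : Nat) (v : List (List Bool)) (q : List (Nat × Nat)),
      InvA g n m v q → falseCnt v + q.length ≤ fuel →
      Shaped (bfsAuxA g n m fuel v q) n m ∧ SoundE g n m (bfsAuxA g n m fuel v q) ∧
        ClosedE g n m (bfsAuxA g n m fuel v q) ∧
        (∀ r c, bget v r c = true → bget (bfsAuxA g n m fuel v q) r c = true) := by
  have hdone : ∀ (v : List (List Bool)), InvA g n m v [] →
      Shaped v n m ∧ SoundE g n m v ∧ ClosedE g n m v ∧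
        (∀ r c, bget v r c = true → bget v r c = true) := by
    intro v hinv
    obtain ⟨hsh, hsound, _, hfront⟩ := hinv
    refine ⟨hsh, hsound, ?_, fun _ _ h => h⟩
    intro r c hr hc hdot hnear
    obtain ⟨r', c', hadj, hb⟩ := (nearB_iff hsh r c).1 hnear
    exact hfront r' c' hb (by simp) r c hr hc (adj_symm hadj) hdot
  intro fuel
  induction fuel with
  | zero =>
      intro v q hinv hmu
      have hq : q = [] := List.length_eq_zero_iff.1 (by omega)
      subst hq
      exact hdone v hinv
  | succ fuel ih =>
      intro v q hinv hmu
      cases q with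
      | nil => exact hdone v hinv
      | cons p q =>
          obtain ⟨r, c⟩ := p
          obtain ⟨hinv', hmu', hmono'⟩ := bfs_fold_props hinv
          have hrun := ih _ _ hinv' (by simp only [List.length_cons] at hmu hmu'; omega)
          have heq : bfsAuxA g n m (fuel + 1) v ((r, c) :: q)
              = bfsAuxA g n m fuel
                (dirsA.foldl (fun st d => stepOneA g n m st ((r : Int) + d.1) ((c : Int) + d.2)) (v, q)).1
                (dirsA.foldl (fun st d => stepOneA g n m st ((r : Int) + d.1) ((c : Int) + d.2)) (v, q)).2 := rfl
          rw [heq]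
          exact ⟨hrun.1, hrun.2.1, hrun.2.2.1, fun a b h => hrun.2.2.2 _ _ (hmono' _ _ h)⟩

def SeedP (g : List (List Char)) (n m : Nat) (S : List (List Bool) × List (Nat × Nat)) : Prop :=
  Shaped S.1 n m ∧ SoundE g n m S.1 ∧ (∀ p ∈ S.2, bget S.1 p.1 p.2 = true) ∧
  (∀ a b, bget S.1 a b = true → (a, b) ∈ S.2)

theorem seedCellA_props {g : List (List Char)} {n m : Nat}
    (S : List (List Bool) × List (Nat × Nat)) (r c : Nat) (hr : r < n) (hc : c < m)
    (hbord : r = 0 ∨ r = n - 1 ∨ c = 0 ∨ c = m - 1) (hP : SeedP g n m S) :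
    SeedP g n m (seedCellA g S r c) ∧
    (∀ a b, bget S.1 a b = true → bget (seedCellA g S r c).1 a b = true) ∧
    (cget g r c = '.' → bget (seedCellA g S r c).1 r c = true) := by
  obtain ⟨hsh, hso, hqm, hqall⟩ := hP
  by_cases hcond : (decide (cget g r c = '.') && !bget S.1 r c) = true
  · have hres : seedCellA g S r c = (setTrue S.1 r c, S.2 ++ [(r, c)]) := by
      unfold seedCellA
      rw [if_pos hcond]
    simp only [Bool.and_eq_true, Bool.not_eq_true', decide_eq_true_eq] at hcond
    obtain ⟨hdot, hnv⟩ := hcond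
    have hmono := bget_setTrue_mono hsh hr hc
    rw [hres]
    refine ⟨⟨setTrue_shape hsh _ _, ?_, ?_, ?_⟩, hmono, fun _ => bget_setTrue_self hsh hr hc⟩
    · intro a b hab
      by_cases hx : a = r ∧ b = c
      · obtain ⟨rfl, rfl⟩ := hx
        exact ExtP.base a b hr hc hbord hdot
      · rw [bget_setTrue_other _ _ _ _ hx] at hab
        exact hso _ _ hab
    · intro p hp
      rcases List.mem_append.1 hp with hp | hp
      · exact hmono _ _ (hqm _ hp)
      · simp at hp
        subst hp
        exact bget_setTrue_self hsh hr hc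
    · intro a b hab
      by_cases hx : a = r ∧ b = c
      · obtain ⟨rfl, rfl⟩ := hx
        exact List.mem_append_right _ (by simp)
      · rw [bget_setTrue_other _ _ _ _ hx] at hab
        exact List.mem_append_left _ (hqall _ _ hab)
  · have hres : seedCellA g S r c = S := by
      unfold seedCellA
      rw [if_neg hcond]
    rw [hres]
    refine ⟨⟨hsh, hso, hqm, hqall⟩, fun _ _ h => h, ?_⟩
    intro hdot
    by_contra hfalse
    apply hcond
    simp only [Bool.and_eq_true, Bool.not_eq_true', decide_eq_true_eq]
    refine ⟨hdot, ?_⟩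
    cases hb : bget S.1 r c
    · rfl
    · exact absurd hb hfalse

def seedsA (g : List (List Char)) (n m : Nat) : List (List Bool) × List (Nat × Nat) :=
  let st0 : List (List Bool) × List (Nat × Nat) := (List.replicate n (List.replicate m false), [])
  let st1 := (List.range n).foldl (fun st r => [0, m - 1].foldl (fun st c => seedCellA g st r c) st) st0
  (List.range m).foldl (fun st c => [0, n - 1].foldl (fun st r => seedCellA g st r c) st) st1

theorem computeExternalA_eq (g : List (List Char)) (n m : Nat) :
    computeExternalA g n m
      = bfsAuxA g n m (n * m + (seedsA g n m).2.length) (seedsA g n m).1 (seedsA g n m).2 := rfl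

theorem bget_replicate_false (n m a b : Nat) :
    bget (List.replicate n (List.replicate m false)) a b = false := by
  unfold bget
  rcases Nat.lt_or_ge a n with ha | ha
  · rw [List.getD_replicate _ ha]
    rcases Nat.lt_or_ge b m with hb | hb
    · rw [List.getD_replicate _ hb]
    · rw [List.getD_eq_getElem?_getD, List.getElem?_eq_none (by simpa using hb)]
      rfl
  · have hnil : (List.replicate n (List.replicate m false)).getD a [] = [] := by
      rw [List.getD_eq_getElem?_getD, List.getElem?_eq_none (by simpa using ha)]
      rfl
    rw [hnil]
    rfl

theorem seedsA_props {g : List (List Char)} {n m : Nat} (hn : 1 ≤ n) (hm : 1 ≤ m) :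
    SeedP g n m (seedsA g n m) ∧ SeededE g n m (seedsA g n m).1 := by
  have hst0 : SeedP g n m (List.replicate n (List.replicate m false), ([] : List (Nat × Nat))) := by
    refine ⟨⟨by simp, fun row hrow => ?_⟩, ?_, by simp, ?_⟩
    · rw [List.eq_of_mem_replicate hrow]
      simp
    · intro a b hab
      rw [bget_replicate_false] at hab
      cases hab
    · intro a b hab
      rw [bget_replicate_false] at hab
      cases hab
  -- row fold (left/right border columns)
  have hFstep : ∀ (st : List (List Bool) × List (Nat × Nat)) (r : Nat), r ∈ List.range n →
      SeedP g n m st →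
      SeedP g n m ([0, m - 1].foldl (fun st c => seedCellA g st r c) st) ∧
      (∀ a b, bget st.1 a b = true →
        bget ([0, m - 1].foldl (fun st c => seedCellA g st r c) st).1 a b = true) ∧
      (∀ c0, (c0 = 0 ∨ c0 = m - 1) → cget g r c0 = '.' →
        bget ([0, m - 1].foldl (fun st c => seedCellA g st r c) st).1 r c0 = true) := by
    intro st r hrmem hP
    have hr : r < n := List.mem_range.1 hrmem
    have hfold : [0, m - 1].foldl (fun st c => seedCellA g st r c) st
        = seedCellA g (seedCellA g st r 0) r (m - 1) := rfl
    obtain ⟨hP1, hmono1, hmark1⟩ :=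
      seedCellA_props st r 0 hr (by omega) (Or.inr (Or.inr (Or.inl rfl))) hP
    obtain ⟨hP2, hmono2, hmark2⟩ :=
      seedCellA_props _ r (m - 1) hr (by omega) (Or.inr (Or.inr (Or.inr rfl))) hP1
    rw [hfold]
    refine ⟨hP2, fun a b h => hmono2 _ _ (hmono1 _ _ h), ?_⟩
    intro c0 hc0 hdot
    rcases hc0 with rfl | rfl
    · exact hmono2 _ _ (hmark1 hdot)
    · exact hmark2 hdot
  have hst1P : SeedP g n m ((List.range n).foldl
      (fun st r => [0, m - 1].foldl (fun st c => seedCellA g st r c) st)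
      (List.replicate n (List.replicate m false), [])) :=
    foldl_inv _ _ _ (fun st r hr hP => (hFstep st r hr hP).1) _ hst0
  have hst1M : ∀ r ∈ List.range n, ∀ c0, (c0 = 0 ∨ c0 = m - 1) → cget g r c0 = '.' →
      bget ((List.range n).foldl
        (fun st r => [0, m - 1].foldl (fun st c => seedCellA g st r c) st)
        (List.replicate n (List.replicate m false), [])).1 r c0 = true := by
    have := foldl_marks (fun st r => [0, m - 1].foldl (fun st c => seedCellA g st r c) st)
      (List.range n) (SeedP g n m)
      (fun r st => ∀ c0, (c0 = 0 ∨ c0 = m - 1) → cget g r c0 = '.' → bget st.1 r c0 = true)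
      (fun st r hr hP => (hFstep st r hr hP).1)
      (fun st r hr hP => (hFstep st r hr hP).2.2)
      (fun st a b hb hP hQ c0 hc0 hdot => (hFstep st b hb hP).2.1 _ _ (hQ c0 hc0 hdot))
      _ hst0
    exact fun r hr c0 => this r hr c0
  -- column fold (top/bottom border rows)
  have hGstep : ∀ (st : List (List Bool) × List (Nat × Nat)) (c : Nat), c ∈ List.range m →
      SeedP g n m st →
      SeedP g n m ([0, n - 1].foldl (fun st r => seedCellA g st r c) st) ∧
      (∀ a b, bget st.1 a b = true →
        bget ([0, n - 1].foldl (fun st r => seedCellA g st r c) st).1 a b = true) ∧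
      (∀ r0, (r0 = 0 ∨ r0 = n - 1) → cget g r0 c = '.' →
        bget ([0, n - 1].foldl (fun st r => seedCellA g st r c) st).1 r0 c = true) := by
    intro st c hcmem hP
    have hc : c < m := List.mem_range.1 hcmem
    have hfold : [0, n - 1].foldl (fun st r => seedCellA g st r c) st
        = seedCellA g (seedCellA g st 0 c) (n - 1) c := rfl
    obtain ⟨hP1, hmono1, hmark1⟩ := seedCellA_props st 0 c (by omega) hc (Or.inl rfl) hP
    obtain ⟨hP2, hmono2, hmark2⟩ :=
      seedCellA_props _ (n - 1) c (by omega) hc (Or.inr (Or.inl rfl)) hP1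
    rw [hfold]
    refine ⟨hP2, fun a b h => hmono2 _ _ (hmono1 _ _ h), ?_⟩
    intro r0 hr0 hdot
    rcases hr0 with rfl | rfl
    · exact hmono2 _ _ (hmark1 hdot)
    · exact hmark2 hdot
  have hseeds : seedsA g n m = (List.range m).foldl
      (fun st c => [0, n - 1].foldl (fun st r => seedCellA g st r c) st)
      ((List.range n).foldl
        (fun st r => [0, m - 1].foldl (fun st c => seedCellA g st r c) st)
        (List.replicate n (List.replicate m false), [])) := rfl
  have hst2P : SeedP g n m (seedsA g n m) := by
    rw [hseeds]
    exact foldl_inv _ _ _ (fun st c hc hP => (hGstep st c hc hP).1) _ hst1P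
  have hkeep1 : ∀ c0 ∈ List.range m, ∀ r0, (r0 = 0 ∨ r0 = n - 1) → cget g r0 c0 = '.' →
      bget (seedsA g n m).1 r0 c0 = true := by
    rw [hseeds]
    have := foldl_marks (fun st c => [0, n - 1].foldl (fun st r => seedCellA g st r c) st)
      (List.range m) (SeedP g n m)
      (fun c st => ∀ r0, (r0 = 0 ∨ r0 = n - 1) → cget g r0 c = '.' → bget st.1 r0 c = true)
      (fun st c hc hP => (hGstep st c hc hP).1)
      (fun st c hc hP => (hGstep st c hc hP).2.2)
      (fun st a b hb hP hQ r0 hr0 hdot => (hGstep st b hb hP).2.1 _ _ (hQ r0 hr0 hdot))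
      _ hst1P
    exact fun c hc r0 => this c hc r0
  have hkeep2 : ∀ r0 ∈ List.range n, ∀ c0, (c0 = 0 ∨ c0 = m - 1) → cget g r0 c0 = '.' →
      bget (seedsA g n m).1 r0 c0 = true := by
    rw [hseeds]
    intro r0 hr0 c0 hc0 hdot
    refine foldl_keeps (fun st c => [0, n - 1].foldl (fun st r => seedCellA g st r c) st)
      (List.range m) (SeedP g n m)
      (fun st => bget st.1 r0 c0 = true)
      (fun st c hc hP => (hGstep st c hc hP).1)
      (fun st c hc hP hQ => (hGstep st c hc hP).2.1 _ _ hQ)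
      _ hst1P (hst1M r0 hr0 c0 hc0 hdot)
  refine ⟨hst2P, ?_⟩
  intro a b ha hb hbord hdot
  rcases hbord with h | h | h | h
  · exact hkeep1 b (List.mem_range.2 hb) a (Or.inl h) hdot
  · exact hkeep1 b (List.mem_range.2 hb) a (Or.inr h) hdot
  · exact hkeep2 a (List.mem_range.2 ha) b (Or.inl h) hdot
  · exact hkeep2 a (List.mem_range.2 ha) b (Or.inr h) hdot

theorem computeExternalA_char {g : List (List Char)} {n m : Nat} (hn : 1 ≤ n) (hm : 1 ≤ m) :
    ∀ r c, bget (computeExternalA g n m) r c = true ↔ ExtP g n m r c := by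
  obtain ⟨⟨hsh, hso, hqm, hqall⟩, hseed⟩ := seedsA_props (g := g) (hn := hn) (hm := hm)
  have hinv : InvA g n m (seedsA g n m).1 (seedsA g n m).2 := by
    refine ⟨hsh, hso, hqm, ?_⟩
    intro r c hb hnin
    exact absurd (hqall _ _ hb) hnin
  have hmu : falseCnt (seedsA g n m).1 + (seedsA g n m).2.length
      ≤ n * m + (seedsA g n m).2.length := by
    have := falseCnt_le (seedsA g n m).1 n m hsh
    omega
  obtain ⟨hsh', hso', hcl', hmono'⟩ := bfsAuxA_run _ _ _ hinv hmu
  rw [computeExternalA_eq]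
  refine char_of hso' ?_ hcl'
  intro a b ha hb hbord hdot
  exact hmono' _ _ (hseed a b ha hb hbord hdot)

-- ---------- per-request grids ----------
def GRel (n m : Nat) (gA gB : List (List Char)) : Prop :=
  gA.length = n ∧ (∀ row ∈ gA, m ≤ row.length) ∧ Shaped gB n m ∧
  (∀ r c, r < n → c < m → cget gA r c = cget gB r c)

def GShapeA (g : List (List Char)) (n m : Nat) : Prop :=
  g.length = n ∧ ∀ row ∈ g, m ≤ row.length

theorem setDot_pres {g : List (List Char)} {n m : Nat} (h : GShapeA g n m) (r c : Nat) :
    GShapeA (setDot g r c) n m := by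
  by_cases hr : r < g.length
  · constructor
    · simpa [setDot] using h.1
    · intro row hrow
      unfold setDot at hrow
      rcases List.mem_or_eq_of_mem_set hrow with h2 | h2
      · exact h.2 _ h2
      · subst h2
        rw [List.length_set]
        refine h.2 _ ?_
        rw [List.getD_eq_getElem?_getD, List.getElem?_eq_getElem hr]
        exact List.getElem_mem hr
  · unfold setDot
    rw [List.set_eq_of_length_le (by omega)]
    exact h

theorem cget_setDot_self {g : List (List Char)} (r c : Nat)
    (hr : r < g.length) (hc : c < (g.getD r []).length) : cget (setDot g r c) r c = '.' := by
  unfold cget setDot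
  rw [getD_set_row, if_pos ⟨rfl, hr⟩, List.getD_eq_getElem?_getD, List.getElem?_set,
    if_pos rfl, if_pos hc]
  rfl

theorem cget_setDot_other {g : List (List Char)} (r c a b : Nat)
    (hne : ¬(a = r ∧ b = c)) : cget (setDot g r c) a b = cget g a b := by
  unfold cget setDot
  rw [getD_set_row]
  by_cases h1 : a = r ∧ r < g.length
  · obtain ⟨rfl, h2⟩ := h1
    rw [if_pos ⟨rfl, h2⟩]
    have hcc : ¬ c = b := fun h => hne ⟨rfl, h.symm⟩
    rw [List.getD_eq_getElem?_getD, List.getElem?_set, if_neg hcc, ← List.getD_eq_getElem?_getD]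
  · rw [if_neg h1]

theorem getD_map_lt {α β : Type} (f : α → β) (l : List α) (i : Nat) (h : i < l.length)
    (d : β) (d' : α) : (l.map f).getD i d = f (l.getD i d') := by
  rw [List.getD_eq_getElem?_getD, List.getElem?_map, List.getElem?_eq_getElem h,
    List.getD_eq_getElem?_getD, List.getElem?_eq_getElem h]
  rfl

theorem craneA_inner_char {g : List (List Char)} {n m : Nat} (hsh : GShapeA g n m)
    {r : Nat} (hr : r < n) (t : Char) :
    ∀ (k : Nat), k ≤ m →
      GShapeA ((List.range k).foldl (fun g c => if cget g r c = t then setDot g r c else g) g) n m ∧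
      (∀ a b, cget ((List.range k).foldl (fun g c => if cget g r c = t then setDot g r c else g) g) a b
        = if a = r ∧ b < k ∧ cget g a b = t then '.' else cget g a b) := by
  intro k
  induction k with
  | zero =>
      intro _
      simp only [List.range_zero, List.foldl_nil]
      exact ⟨hsh, fun a b => by simp⟩
  | succ k ih =>
      intro hk
      obtain ⟨ihsh, ihpt⟩ := ih (by omega)
      rw [List.range_succ, List.foldl_append, List.foldl_cons, List.foldl_nil]
      set gk := (List.range k).foldl (fun g c => if cget g r c = t then setDot g r c else g) g with hgk
      have hrk : cget gk r k = cget g r k := by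
        rw [ihpt]
        simp
      by_cases hcase : cget g r k = t
      · rw [if_pos (by rw [hrk]; exact hcase)]
        have hrlen : r < gk.length := by rw [ihsh.1]; exact hr
        have hclen : k < (gk.getD r []).length := by
          have hmem : gk.getD r [] ∈ gk := by
            rw [List.getD_eq_getElem?_getD, List.getElem?_eq_getElem hrlen]
            exact List.getElem_mem hrlen
          have := ihsh.2 _ hmem
          omega
        refine ⟨setDot_pres ihsh r k, ?_⟩
        intro a b
        by_cases hx : a = r ∧ b = k
        · obtain ⟨rfl, rfl⟩ := hx
          rw [cget_setDot_self _ _ hrlen hclen, if_pos ⟨rfl, by omega, hcase⟩]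
        · rw [cget_setDot_other _ _ _ _ hx, ihpt]
          by_cases hy : a = r ∧ b < k ∧ cget g a b = t
          · rw [if_pos hy, if_pos ⟨hy.1, by omega, hy.2.2⟩]
          · have hneg2 : ¬(a = r ∧ b < k + 1 ∧ cget g a b = t) := by
              rintro ⟨rfl, hb1, hc1⟩
              have hbk : b < k := by
                by_contra hbb
                exact hx ⟨rfl, by omega⟩
              exact hy ⟨rfl, hbk, hc1⟩
            rw [if_neg hy, if_neg hneg2]
      · rw [if_neg (by rw [hrk]; exact hcase)]
        refine ⟨ihsh, ?_⟩
        intro a b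
        rw [ihpt]
        by_cases hx : a = r ∧ b < k + 1 ∧ cget g a b = t
        · obtain ⟨rfl, hb, hcc⟩ := hx
          have hbk : b < k := by
            by_contra hbb
            have : b = k := by omega
            subst this
            exact hcase hcc
          rw [if_pos ⟨rfl, hbk, hcc⟩, if_pos ⟨rfl, hb, hcc⟩]
        · have hneg2 : ¬(a = r ∧ b < k ∧ cget g a b = t) := by
            rintro ⟨rfl, hb1, hc1⟩
            exact hx ⟨rfl, by omega, hc1⟩
          rw [if_neg hneg2, if_neg hx]

theorem craneA_char {g : List (List Char)} {n m : Nat} (hsh : GShapeA g n m) (t : Char) :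
    GShapeA (craneA g n m t) n m ∧
    (∀ a b, cget (craneA g n m t) a b
      = if a < n ∧ b < m ∧ cget g a b = t then '.' else cget g a b) := by
  suffices h : ∀ (k : Nat), k ≤ n →
      GShapeA ((List.range k).foldl (fun g r =>
        (List.range m).foldl (fun g c => if cget g r c = t then setDot g r c else g) g) g) n m ∧
      (∀ a b, cget ((List.range k).foldl (fun g r =>
          (List.range m).foldl (fun g c => if cget g r c = t then setDot g r c else g) g) g) a b
        = if a < k ∧ b < m ∧ cget g a b = t then '.' else cget g a b) by
    exact h n le_rfl
  intro k
  induction k with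
  | zero =>
      intro _
      simp only [List.range_zero, List.foldl_nil]
      exact ⟨hsh, fun a b => by simp⟩
  | succ k ih =>
      intro hk
      obtain ⟨ihsh, ihpt⟩ := ih (by omega)
      rw [List.range_succ, List.foldl_append, List.foldl_cons, List.foldl_nil]
      set gk := (List.range k).foldl (fun g r =>
        (List.range m).foldl (fun g c => if cget g r c = t then setDot g r c else g) g) g with hgk
      obtain ⟨rsh, rpt⟩ := craneA_inner_char ihsh (show k < n by omega) t m le_rfl
      refine ⟨rsh, ?_⟩
      intro a b
      rw [rpt a b]
      by_cases hak : a = k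
      · subst hak
        have he : cget gk a b = cget g a b := by
          rw [ihpt]
          simp
        rw [he]
        by_cases hx : b < m ∧ cget g a b = t
        · rw [if_pos ⟨rfl, hx⟩, if_pos ⟨by omega, hx⟩]
        · rw [if_neg (fun hh => hx ⟨hh.2.1, hh.2.2⟩), if_neg (fun hh => hx ⟨hh.2.1, hh.2.2⟩)]
      · have hne : ¬(a = k ∧ b < m ∧ cget gk a b = t) := fun hh => hak hh.1
        rw [if_neg hne, ihpt]
        by_cases hx : a < k ∧ b < m ∧ cget g a b = t
        · rw [if_pos hx, if_pos ⟨by omega, hx.2⟩]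
        · have hneg2 : ¬(a < k + 1 ∧ b < m ∧ cget g a b = t) := by
            rintro ⟨h1, h2, h3⟩
            exact hx ⟨by omega, h2, h3⟩
          rw [if_neg hx, if_neg hneg2]

theorem shaped_craneB {gB : List (List Char)} {n m : Nat} (h : Shaped gB n m) (t : Char) :
    Shaped (craneB t gB) n m := by
  constructor
  · simpa [craneB] using h.1
  · intro row hrow
    unfold craneB at hrow
    obtain ⟨row0, hmem, rfl⟩ := List.mem_map.1 hrow
    simpa using h.2 _ hmem

theorem cget_craneB {gB : List (List Char)} {n m : Nat} (h : Shaped gB n m) (t : Char)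
    {a b : Nat} (ha : a < n) (hb : b < m) :
    cget (craneB t gB) a b = if cget gB a b = t then '.' else cget gB a b := by
  have hl := h.1
  have hal : a < gB.length := by omega
  have hmem : gB.getD a [] ∈ gB := by
    rw [List.getD_eq_getElem?_getD, List.getElem?_eq_getElem hal]
    exact List.getElem_mem hal
  have hbl : b < (gB.getD a []).length := by
    rw [h.2 _ hmem]
    exact hb
  unfold cget craneB
  rw [getD_map_lt _ _ _ hal [] [], getD_map_lt _ _ _ hbl ' ' ' ']

theorem crane_rel {n m : Nat} {gA gB : List (List Char)} (h : GRel n m gA gB) (t : Char) :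
    GRel n m (craneA gA n m t) (craneB t gB) := by
  obtain ⟨hlen, hrows, hshB, hpt⟩ := h
  obtain ⟨hshA', hptA⟩ := craneA_char ⟨hlen, hrows⟩ t
  refine ⟨hshA'.1, hshA'.2, shaped_craneB hshB t, ?_⟩
  intro r c hr hc
  rw [hptA, cget_craneB hshB t hr hc, hpt r c hr hc]
  by_cases hx : cget gB r c = t
  · rw [if_pos ⟨hr, hc, hx⟩, if_pos hx]
  · rw [if_neg (fun hh => hx hh.2.2), if_neg hx]

def remA (g : List (List Char)) (n m : Nat) (t : Char) : List (Nat × Nat) :=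
  (List.range n).foldl (fun acc r => (List.range m).foldl (fun acc c =>
    if ¬(cget g r c = t) then acc
    else if accessibleA g (computeExternalA g n m) n m r c then acc ++ [(r, c)] else acc) acc) []

theorem forkA_eq (g : List (List Char)) (n m : Nat) (t : Char) :
    forkA g n m t = (remA g n m t).foldl (fun g p => setDot g p.1 p.2) g := rfl

theorem remA_mem {g : List (List Char)} {n m : Nat} {t : Char} (a b : Nat) :
    (a, b) ∈ remA g n m t ↔ a < n ∧ b < m ∧ cget g a b = t ∧
      accessibleA g (computeExternalA g n m) n m a b = true := by
  have hinner : ∀ (acc : List (Nat × Nat)) (r : Nat), r ∈ List.range n →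
      (List.range m).foldl (fun acc c =>
        if ¬(cget g r c = t) then acc
        else if accessibleA g (computeExternalA g n m) n m r c then acc ++ [(r, c)] else acc) acc
      = acc ++ ((List.range m).filter (fun c =>
          decide (cget g r c = t) && accessibleA g (computeExternalA g n m) n m r c)).map
          (fun c => (r, c)) := by
    intro acc r _
    rw [PySem.List.foldl_congr_mem (List.range m) _
      (fun acc c => if (decide (cget g r c = t)
          && accessibleA g (computeExternalA g n m) n m r c) = true
        then acc ++ [(r, c)] else acc) acc ?_]
    · exact PySem.List.foldl_append_if _ _ _ _
    · intro acc2 x _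
      by_cases h1 : cget g r x = t
      · by_cases h2 : accessibleA g (computeExternalA g n m) n m r x = true
        · simp [h1, h2]
        · simp [h1, h2]
      · simp [h1]
  have houter : remA g n m t = (List.range n).flatMap (fun r =>
      ((List.range m).filter (fun c =>
        decide (cget g r c = t) && accessibleA g (computeExternalA g n m) n m r c)).map
        (fun c => (r, c))) := by
    unfold remA
    rw [PySem.List.foldl_congr_mem (List.range n) _
      (fun acc r => acc ++ ((List.range m).filter (fun c =>
        decide (cget g r c = t) && accessibleA g (computeExternalA g n m) n m r c)).map
        (fun c => (r, c))) [] (fun acc x hx => hinner acc x hx)]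
    rw [PySem.List.foldl_append_eq_flatMap]
    rfl
  rw [houter]
  simp only [List.mem_flatMap, List.mem_map, List.mem_filter, List.mem_range,
    Bool.and_eq_true, decide_eq_true_eq, Prod.mk.injEq]
  constructor
  · rintro ⟨r, hr, c, ⟨hcm, hct, hacc⟩, rfl, rfl⟩
    exact ⟨hr, hcm, hct, hacc⟩
  · rintro ⟨h1, h2, h3, h4⟩
    exact ⟨a, h1, b, ⟨h2, h3, h4⟩, rfl, rfl⟩

theorem cget_foldl_setDot : ∀ (l : List (Nat × Nat)) (g : List (List Char)) (n m : Nat),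
    GShapeA g n m → (∀ p ∈ l, p.1 < n ∧ p.2 < m) →
    GShapeA (l.foldl (fun g p => setDot g p.1 p.2) g) n m ∧
    (∀ a b, cget (l.foldl (fun g p => setDot g p.1 p.2) g) a b
      = if (a, b) ∈ l then '.' else cget g a b) := by
  intro l
  induction l with
  | nil =>
      intro g n m hsh _
      simp only [List.foldl_nil]
      exact ⟨hsh, fun a b => by simp⟩
  | cons p rest ih =>
      obtain ⟨p1, p2⟩ := p
      intro g n m hsh hmem
      obtain ⟨hp1, hp2⟩ := hmem (p1, p2) List.mem_cons_self
      have hsd : GShapeA (setDot g p1 p2) n m := setDot_pres hsh _ _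
      obtain ⟨ihsh, ihpt⟩ := ih (setDot g p1 p2) n m hsd
        (fun q hq => hmem q (List.mem_cons_of_mem _ hq))
      rw [List.foldl_cons]
      refine ⟨ihsh, ?_⟩
      intro a b
      rw [ihpt]
      by_cases hx : (a, b) ∈ rest
      · rw [if_pos hx, if_pos (List.mem_cons_of_mem _ hx)]
      · rw [if_neg hx]
        by_cases hy : a = p1 ∧ b = p2
        · obtain ⟨rfl, rfl⟩ := hy
          have hrl : a < g.length := by rw [hsh.1]; exact hp1
          have hmemrow : g.getD a [] ∈ g := by
            rw [List.getD_eq_getElem?_getD, List.getElem?_eq_getElem hrl]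
            exact List.getElem_mem hrl
          have hcl : b < (g.getD a []).length := by
            have := hsh.2 _ hmemrow
            omega
          rw [cget_setDot_self _ _ hrl hcl, if_pos List.mem_cons_self]
        · rw [cget_setDot_other _ _ _ _ hy, if_neg ?_]
          intro hmem2
          rcases List.mem_cons.1 hmem2 with hh | hh
          · simp only [Prod.mk.injEq] at hh
            exact hy hh
          · exact hx hh

theorem shaped_forkB {gB : List (List Char)} {n m : Nat} (t : Char) :
    Shaped (forkB gB n m t) n m := shaped_grid _ n m

theorem cget_forkB {gB : List (List Char)} {n m : Nat} (t : Char) {a b : Nat}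
    (ha : a < n) (hb : b < m) :
    cget (forkB gB n m t) a b
      = if (decide (cget gB a b = t)
            && (borderB n m a b || nearB n m (externalB gB n m) a b)) = true
        then '.' else cget gB a b := by
  unfold forkB cget
  exact getD_grid _ n m a b ' ' ha hb

theorem accessibleA_iff {gA gB : List (List Char)} {n m : Nat} {vA eB : List (List Bool)}
    (hva : ∀ x y, bget vA x y = true ↔ ExtP gA n m x y)
    (heb : ∀ x y, bget eB x y = true ↔ ExtP gB n m x y)
    (hpt : ∀ x y, x < n → y < m → cget gA x y = cget gB x y)
    {r c : Nat} (hr : r < n) (hc : c < m) :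
    accessibleA gA vA n m r c = (borderB n m r c || nearB n m eB r c) := by
  have hAB : ∀ x y, ExtP gA n m x y ↔ ExtP gB n m x y :=
    fun x y => ⟨extP_congr hpt x y, extP_congr (fun a b ha hb => (hpt a b ha hb).symm) x y⟩
  have hneigh : ∀ x y, (cget gA x y = '.' ∧ bget vA x y = true) ↔ bget eB x y = true := by
    intro x y
    constructor
    · rintro ⟨_, h⟩
      exact (heb x y).2 ((hAB x y).1 ((hva x y).1 h))
    · intro h
      have hA := (hAB x y).2 ((heb x y).1 h)
      exact ⟨(extP_lt hA).2.2, (hva x y).2 hA⟩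
  have hterm : ∀ (nr nc : Int),
      ((if !(inRangeA n m nr nc) then true
        else decide (cget gA nr.toNat nc.toNat = '.') && bget vA nr.toNat nc.toNat) = true)
      ↔ (¬(0 ≤ nr ∧ nr < (n : Int) ∧ 0 ≤ nc ∧ nc < (m : Int))
          ∨ (cget gA nr.toNat nc.toNat = '.' ∧ bget vA nr.toNat nc.toNat = true)) := by
    intro nr nc
    by_cases hin : inRangeA n m nr nc = true
    · rw [if_neg (by simp [hin])]
      have hin' : 0 ≤ nr ∧ nr < (n : Int) ∧ 0 ≤ nc ∧ nc < (m : Int) := by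
        simp only [inRangeA, Bool.and_eq_true, decide_eq_true_eq] at hin
        exact ⟨hin.1.1.1, hin.1.1.2, hin.1.2, hin.2⟩
      simp only [Bool.and_eq_true, decide_eq_true_eq]
      constructor
      · exact Or.inr
      · rintro (h | h)
        · exact absurd hin' h
        · exact h
    · have hnot : ¬(0 ≤ nr ∧ nr < (n : Int) ∧ 0 ≤ nc ∧ nc < (m : Int)) := by
        intro hcon
        apply hin
        simp only [inRangeA, Bool.and_eq_true, decide_eq_true_eq]
        exact ⟨⟨⟨hcon.1, hcon.2.1⟩, hcon.2.2.1⟩, hcon.2.2.2⟩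
      have hfalse : inRangeA n m nr nc = false := by
        cases hxx : inRangeA n m nr nc
        · rfl
        · exact absurd hxx hin
      rw [hfalse]
      simp [hnot]
  apply Bool.coe_iff_coe.1
  unfold accessibleA
  simp only [dirsA, List.any_cons, List.any_nil, Bool.or_false, Bool.or_eq_true]
  rw [hterm, hterm, hterm, hterm]
  simp only [borderB, nearB, Bool.or_eq_true, Bool.and_eq_true, decide_eq_true_eq]
  constructor
  · rintro (h | h | h | h)
    · rcases h with h | h
      · exact Or.inl (Or.inl (Or.inl (Or.inl (by omega))))
      · by_cases hr0 : r = 0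
        · exact Or.inl (Or.inl (Or.inl (Or.inl hr0)))
        · rw [show ((r : Int) + -1).toNat = r - 1 by omega,
            show ((c : Int) + 0).toNat = c by omega] at h
          exact Or.inr (Or.inl (Or.inl (Or.inl ⟨by omega, (hneigh _ _).1 h⟩)))
    · rcases h with h | h
      · exact Or.inl (Or.inl (Or.inl (Or.inr (by omega))))
      · rw [show ((r : Int) + 1).toNat = r + 1 by omega,
          show ((c : Int) + 0).toNat = c by omega] at h
        have hb := (hneigh _ _).1 h
        have hlt := extP_lt ((heb _ _).1 hb)
        exact Or.inr (Or.inl (Or.inl (Or.inr ⟨hlt.1, hb⟩)))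
    · rcases h with h | h
      · exact Or.inl (Or.inl (Or.inr (by omega)))
      · by_cases hc0 : c = 0
        · exact Or.inl (Or.inl (Or.inr hc0))
        · rw [show ((r : Int) + 0).toNat = r by omega,
            show ((c : Int) + -1).toNat = c - 1 by omega] at h
          exact Or.inr (Or.inl (Or.inr ⟨by omega, (hneigh _ _).1 h⟩))
    · rcases h with h | h
      · exact Or.inl (Or.inr (by omega))
      · rw [show ((r : Int) + 0).toNat = r by omega,
          show ((c : Int) + 1).toNat = c + 1 by omega] at h
        have hb := (hneigh _ _).1 h
        have hlt := extP_lt ((heb _ _).1 hb)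
        exact Or.inr (Or.inr ⟨hlt.2.1, hb⟩)
  · rintro ((((h | h) | h) | h) | (((h | h) | h) | h))
    · exact Or.inl (Or.inl (by omega))
    · exact Or.inr (Or.inl (Or.inl (by omega)))
    · exact Or.inr (Or.inr (Or.inl (Or.inl (by omega))))
    · exact Or.inr (Or.inr (Or.inr (Or.inl (by omega))))
    · refine Or.inl (Or.inr ?_)
      rw [show ((r : Int) + -1).toNat = r - 1 by omega, show ((c : Int) + 0).toNat = c by omega]
      exact (hneigh _ _).2 h.2
    · refine Or.inr (Or.inl (Or.inr ?_))
      rw [show ((r : Int) + 1).toNat = r + 1 by omega, show ((c : Int) + 0).toNat = c by omega]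
      exact (hneigh _ _).2 h.2
    · refine Or.inr (Or.inr (Or.inl (Or.inr ?_)))
      rw [show ((r : Int) + 0).toNat = r by omega, show ((c : Int) + -1).toNat = c - 1 by omega]
      exact (hneigh _ _).2 h.2
    · refine Or.inr (Or.inr (Or.inr (Or.inr ?_)))
      rw [show ((r : Int) + 0).toNat = r by omega, show ((c : Int) + 1).toNat = c + 1 by omega]
      exact (hneigh _ _).2 h.2

theorem fork_rel {n m : Nat} {gA gB : List (List Char)} (h : GRel n m gA gB)
    (hn : 1 ≤ n) (hm : 1 ≤ m) (t : Char) :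
    GRel n m (forkA gA n m t) (forkB gB n m t) := by
  obtain ⟨hlen, hrows, hshB, hpt⟩ := h
  have hva := computeExternalA_char (g := gA) (n := n) (m := m) hn hm
  have hvb := externalB_char (g := gB) (n := n) (m := m)
  have hmem : ∀ p ∈ remA gA n m t, p.1 < n ∧ p.2 < m := by
    intro p hp
    obtain ⟨p1, p2⟩ := p
    have := (remA_mem p1 p2).1 hp
    exact ⟨this.1, this.2.1⟩
  obtain ⟨hshA', hptA⟩ := cget_foldl_setDot (remA gA n m t) gA n m ⟨hlen, hrows⟩ hmem
  rw [forkA_eq]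
  refine ⟨hshA'.1, hshA'.2, shaped_forkB t, ?_⟩
  intro a b ha hb
  rw [hptA, cget_forkB t ha hb]
  have hacc : accessibleA gA (computeExternalA gA n m) n m a b
      = (borderB n m a b || nearB n m (externalB gB n m) a b) :=
    accessibleA_iff hva hvb hpt ha hb
  by_cases hcond : cget gA a b = t
      ∧ (borderB n m a b || nearB n m (externalB gB n m) a b) = true
  · have hbcond : (decide (cget gB a b = t)
        && (borderB n m a b || nearB n m (externalB gB n m) a b)) = true := by
      rw [Bool.and_eq_true, decide_eq_true_eq, ← hpt a b ha hb]
      exact hcond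
    rw [if_pos ((remA_mem a b).2 ⟨ha, hb, hcond.1, by rw [hacc]; exact hcond.2⟩),
      if_pos hbcond]
  · have hnegA : (a, b) ∉ remA gA n m t := by
      intro hmem2
      obtain ⟨_, _, h3, h4⟩ := (remA_mem a b).1 hmem2
      rw [hacc] at h4
      exact hcond ⟨h3, h4⟩
    have hnegB : ¬ (decide (cget gB a b = t)
        && (borderB n m a b || nearB n m (externalB gB n m) a b)) = true := by
      intro hh
      rw [Bool.and_eq_true, decide_eq_true_eq, ← hpt a b ha hb] at hh
      exact hcond hh
    rw [if_neg hnegA, if_neg hnegB]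
    exact hpt a b ha hb

theorem countP_eq_range : ∀ (row : List Char) (p : Char → Bool),
    row.countP p = (List.range row.length).countP (fun i => p (row.getD i ' ')) := by
  intro row
  induction row with
  | nil => intro p; simp
  | cons a tl ih =>
      intro p
      rw [List.countP_cons, List.length_cons, List.range_succ_eq_map, List.countP_cons,
        List.countP_map]
      have hfun : (fun i => p ((a :: tl).getD i ' ')) ∘ Nat.succ
          = fun i => p (tl.getD i ' ') := by
        funext i
        simp
      rw [hfun, ← ih p]
      simp

theorem sum_map_eq_range : ∀ (l : List (List Char)) (F : List Char → Nat),
    (l.map F).sum = ((List.range l.length).map (fun i => F (l.getD i []))).sum := by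
  intro l
  induction l with
  | nil => intro F; simp
  | cons a tl ih =>
      intro F
      rw [List.map_cons, List.sum_cons, List.length_cons, List.range_succ_eq_map,
        List.map_cons, List.sum_cons, List.map_map]
      have hfun : (fun i => F ((a :: tl).getD i [])) ∘ Nat.succ = fun i => F (tl.getD i []) := by
        funext i
        simp
      rw [hfun, ← ih F]
      simp

theorem count_eq {n m : Nat} {gA gB : List (List Char)} (h : GRel n m gA gB) :
    (List.range n).foldl (fun s r =>
      (List.range m).foldl (fun s c => if ¬(cget gA r c = '.') then s + 1 else s) s) (0 : Int)
    = ((gB.map fun row => row.countP fun ch => ch ≠ '.').sum : Nat) := by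
  obtain ⟨hlen, hrows, hshB, hpt⟩ := h
  have hinner : ∀ (s : Int) (r : Nat),
      (List.range m).foldl (fun s c => if ¬(cget gA r c = '.') then s + 1 else s) s
        = s + ((List.range m).countP (fun c => decide (¬ cget gA r c = '.')) : Nat) := by
    intro s r
    rw [PySem.List.foldl_congr_mem (List.range m) _
      (fun acc c => if (decide (¬ cget gA r c = '.')) = true then acc + 1 else acc) s
      (by intro acc x _; by_cases hx : cget gA r x = '.' <;> simp [hx])]
    exact PySem.List.foldl_count_if _ _ _
  have houter : (List.range n).foldl (fun s r =>
      (List.range m).foldl (fun s c => if ¬(cget gA r c = '.') then s + 1 else s) s) (0 : Int)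
      = 0 + ((List.range n).map (fun r =>
          (((List.range m).countP (fun c => decide (¬ cget gA r c = '.')) : Nat) : Int))).sum := by
    rw [PySem.List.foldl_congr_mem (List.range n) _
      (fun s r => s + (((List.range m).countP (fun c => decide (¬ cget gA r c = '.')) : Nat) : Int)) 0
      (by intro acc x _; exact hinner acc x)]
    exact PySem.List.foldl_add _ _ _
  rw [houter, zero_add]
  rw [sum_map_eq_range gB _, Nat.cast_list_sum, List.map_map, hshB.1]
  refine congrArg List.sum (List.map_congr_left ?_)
  intro r hr
  have hrn : r < n := List.mem_range.1 hr
  have hrmem : gB.getD r [] ∈ gB := by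
    have hrl : r < gB.length := by rw [hshB.1]; exact hrn
    rw [List.getD_eq_getElem?_getD, List.getElem?_eq_getElem hrl]
    exact List.getElem_mem hrl
  have hrowlen : (gB.getD r []).length = m := hshB.2 _ hrmem
  simp only [Function.comp_apply]
  rw [countP_eq_range (gB.getD r []) _, hrowlen]
  have : (List.range m).countP (fun c => decide (¬ cget gA r c = '.'))
      = (List.range m).countP (fun i => decide ((gB.getD r []).getD i ' ' ≠ '.')) := by
    refine List.countP_congr ?_
    intro c hc
    have hcm : c < m := List.mem_range.1 hc
    have : cget gA r c = (gB.getD r []).getD c ' ' := hpt r c hrn hcm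
    simp [this]
  rw [this]

-- ===== VERDICT (by name: the statement is the Claim_ definition above) =====
theorem solution_spec : Claim_equal_solution := by
  intro storage requests _ hpre
  obtain ⟨hne, hrows, _, hdisj⟩ := hpre
  have hn : 1 ≤ storage.length := List.length_pos_of_ne_nil hne
  have hrel0 : GRel storage.length (storage.headD "").toList.length
      (storage.map String.toList)
      (storage.map fun s => s.toList.take (storage.headD "").toList.length) := by
    refine ⟨by simp, ?_, ⟨by simp, ?_⟩, ?_⟩
    · intro row hrow
      obtain ⟨s, hs, rfl⟩ := List.mem_map.1 hrow
      exact hrows s hs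
    · intro row hrow
      obtain ⟨s, hs, rfl⟩ := List.mem_map.1 hrow
      rw [List.length_take]
      have := hrows s hs
      omega
    · intro r c hr hc
      have hrl : r < storage.length := hr
      unfold cget
      rw [getD_map_lt String.toList storage r hrl [] "",
        getD_map_lt (fun s => s.toList.take (storage.headD "").toList.length) storage r hrl [] ""]
      rw [List.getD_eq_getElem?_getD, List.getD_eq_getElem?_getD (l := List.take _ _),
        List.getElem?_take, if_pos hc]
  have hfold : ∀ (reqs : List String) (gA gB : List (List Char)),
      GRel storage.length (storage.headD "").toList.length gA gB →
      (1 ≤ (storage.headD "").toList.length ∨ ∀ req ∈ reqs, req.toList.length = 2) →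
      GRel storage.length (storage.headD "").toList.length
        (reqs.foldl (fun g req => if req.toList.length = 2
          then craneA g storage.length (storage.headD "").toList.length (req.toList.headD ' ')
          else forkA g storage.length (storage.headD "").toList.length (req.toList.headD ' ')) gA)
        (reqs.foldl (fun g req => if req.toList.length = 2
          then craneB (req.toList.headD ' ') g
          else forkB g storage.length (storage.headD "").toList.length (req.toList.headD ' ')) gB) := by
    intro reqs
    induction reqs with
    | nil => intro gA gB hrel _; exact hrel
    | cons req rest ih =>
        intro gA gB hrel hdis
        rw [List.foldl_cons, List.foldl_cons]
        by_cases hlen2 : req.toList.length = 2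
        · rw [if_pos hlen2, if_pos hlen2]
          exact ih _ _ (crane_rel hrel _)
            (hdis.imp id (fun h => fun q hq => h q (List.mem_cons_of_mem _ hq)))
        · rw [if_neg hlen2, if_neg hlen2]
          have hm : 1 ≤ (storage.headD "").toList.length := by
            rcases hdis with h | h
            · exact h
            · exact absurd (h req List.mem_cons_self) hlen2
          exact ih _ _ (fork_rel hrel hn hm _) (Or.inl hm)
  exact count_eq (hfold requests _ _ hrel0 hdisj)
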